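-- pv_equiv track=rewrite | github.com/weeeeey/programmers | 표 편집.py | solution
-- ===== SOURCE A (Python) =====
-- def solution(n, pivot, cmd):
--     answer = ''
--     gr = dict()
--     for i in range(n):
--         gr[i] = [i-1,i+1]
--     gr[0][0]="False"
--     gr[n-1][1]="False"
--
--     garbage = []
--     for c in cmd:
--         if len(c)==1:
--             if c == "Z":
--                 key,left,right = garbage.pop()
--                 gr[key]=[left,right]
--                 if left=="False":
--                     gr[right][0]=key
--                 elif right=="False":
--                     gr[left][1]=key
--                 else:
--                     gr[left][1]=key
--                     gr[right][0]=key
--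
--             else:
--                 left,right = gr[pivot]
--                 if left=="False":
--                     gr[right][0]="False"
--                     del gr[pivot]
--                     garbage.append([pivot,left,right])
--                     pivot=right
--                 elif right=="False":
--                     gr[left][1]="False"
--                     del gr[pivot]
--                     garbage.append([pivot,left,right])
--                     pivot=left
--                 else:
--                     gr[left][1]=right
--                     gr[right][0]=left
--                     del gr[pivot]
--                     garbage.append([pivot,left,right])
--                     pivot=right
--
--         else:
--             dic, move  = c.split(" ")
--             move = int(move)
--             if dic=="D":
--                 for i in range(move):
--                     pivot=gr[pivot][1]
--             else:
--                 for i in range(move):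
--                     pivot=gr[pivot][0]
--
--     answer=["X"]*n
--     for k in gr:
--         answer[k]="O"
--     answer= "".join(answer)
--     return answer
-- ===== SOURCE B (Python) =====
-- def solution(n, pivot, cmd):
--     alive = [True] * n
--     stack = []
--     for c in cmd:
--         if len(c) == 1:
--             if c == "Z":
--                 alive[stack.pop()] = True
--             else:
--                 stack.append(pivot)
--                 alive[pivot] = False
--                 nxt = next((j for j in range(pivot + 1, n) if alive[j]), None)
--                 if nxt is None:
--                     nxt = next(j for j in range(pivot - 1, -1, -1) if alive[j])
--                 pivot = nxt
--         else:
--             d, mv = c.split(" ")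
--             if d == "D":
--                 for _ in range(int(mv)):
--                     pivot = next(j for j in range(pivot + 1, n) if alive[j])
--             else:
--                 for _ in range(int(mv)):
--                     pivot = next(j for j in range(pivot - 1, -1, -1) if alive[j])
--     return "".join("O" if a else "X" for a in alive)
-- ===== Notes on version B (the rewrite author's own statement) =====
-- stated objective: simpler
-- what changed: Replaces A's hand-maintained doubly linked dict (neighbour pairs with 'False' sentinels, relinking on every delete and undo) by a boolean alive-array plus a stack of deleted indices; the pivot is relocated by scanning the array and undo is a single alive[stack.pop()]=True with no relinking.
-- outside the precondition, e.g. on solution(2, 0, ['D 2']): A returns 'OO', B raises StopIteration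
import Mathlib
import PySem

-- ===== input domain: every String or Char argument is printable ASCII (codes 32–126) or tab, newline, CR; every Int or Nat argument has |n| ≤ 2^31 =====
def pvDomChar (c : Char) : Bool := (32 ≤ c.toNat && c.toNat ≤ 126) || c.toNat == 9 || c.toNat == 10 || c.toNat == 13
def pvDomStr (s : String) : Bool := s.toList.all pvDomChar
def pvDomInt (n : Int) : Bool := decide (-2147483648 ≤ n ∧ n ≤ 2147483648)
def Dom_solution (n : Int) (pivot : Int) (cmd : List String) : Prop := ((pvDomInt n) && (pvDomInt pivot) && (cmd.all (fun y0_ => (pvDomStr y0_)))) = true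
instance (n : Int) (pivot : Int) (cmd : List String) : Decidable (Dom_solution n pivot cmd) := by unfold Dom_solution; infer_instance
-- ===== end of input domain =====

-- B replaces A's hand-maintained doubly linked dict (with "False" sentinels, neighbour
-- relinking on delete and undo) by a plain boolean alive-array plus a stack of deleted
-- indices; the pivot is relocated by scanning the array. Objective: simpler.

-- ===== PORT A =====
-- A's dict maps a row index to its [left, right] neighbour pair; Python stores the string
-- "False" for a missing neighbour — ported as `none` (exact: A only ever compares with ==).
-- The Python variable `pivot` itself can be assigned that sentinel, hence `Option Int`.
-- A's `garbage` list is used only as a stack (append / pop at the right end); it is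
-- represented head-first (top of stack = head). Where Python raises (KeyError on a dead
-- or sentinel pivot, IndexError on popping empty garbage, ValueError on int()/unpacking)
-- the port keeps the state unchanged; all such inputs are outside Pre_solution.

-- gr[pivot][1] (step right); none where Python would raise KeyError
def stepRA (gr : PySem.Dict Int (Option Int × Option Int)) (pv : Option Int) : Option Int :=
  match pv with
  | none => none
  | some p => match gr.get? p with
    | none => none
    | some v => v.2

-- gr[pivot][0] (step left)
def stepLA (gr : PySem.Dict Int (Option Int × Option Int)) (pv : Option Int) : Option Int :=
  match pv with
  | none => none
  | some p => match gr.get? p with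
    | none => none
    | some v => v.1

def stepA (s : PySem.Dict Int (Option Int × Option Int) × List (Int × Option Int × Option Int) × Option Int)
    (c : String) : PySem.Dict Int (Option Int × Option Int) × List (Int × Option Int × Option Int) × Option Int :=
  let (gr, garbage, pv) := s
  if PySem.Str.len c == 1 then
    if c == "Z" then
      match garbage with
      | [] => s  -- garbage.pop() raises IndexError
      | (key, left, right) :: rest =>
        let gr := gr.insert key (left, right)
        match left, right with
        | none, none => s          -- gr["False"] would raise KeyError
        | none, some r => (gr.modify r (none, none) (fun v => (some key, v.2)), rest, pv)
        | some l, none => (gr.modify l (none, none) (fun v => (v.1, some key)), rest, pv)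
        | some l, some r =>
            ((gr.modify l (none, none) (fun v => (v.1, some key))).modify r (none, none)
              (fun v => (some key, v.2)), rest, pv)
    else
      match pv with
      | none => s  -- gr["False"] raises KeyError
      | some p =>
        match gr.get? p with
        | none => s  -- KeyError
        | some (left, right) =>
          match left, right with
          | none, none => s        -- gr["False"] would raise KeyError
          | none, some r =>
              ((gr.modify r (none, none) (fun v => (none, v.2))).erase p,
               (p, left, right) :: garbage, some r)
          | some l, none =>
              ((gr.modify l (none, none) (fun v => (v.1, none))).erase p,
               (p, left, right) :: garbage, some l)
          | some l, some r =>
              (((gr.modify l (none, none) (fun v => (v.1, right))).modify r (none, none)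
                  (fun v => (left, v.2))).erase p,
               (p, left, right) :: garbage, some r)
  else
    match PySem.Str.split? c " " with
    | some [dic, mv] =>
      match PySem.Int.ofStr? mv with
      | none => s  -- int() raises ValueError
      | some x =>
        if dic == "D" then (gr, garbage, (PySem.List.pyRange 0 x 1).foldl (fun pv _ => stepRA gr pv) pv)
        else (gr, garbage, (PySem.List.pyRange 0 x 1).foldl (fun pv _ => stepLA gr pv) pv)
    | _ => s  -- unpacking 'dic, move = …' raises ValueError

def solution (n : Int) (pivot : Int) (cmd : List String) : String :=
  let gr := (PySem.List.pyRange 0 n 1).foldl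
    (fun d i => d.insert i ((some (i-1), some (i+1)) : Option Int × Option Int)) PySem.Dict.empty
  let gr := gr.modify 0 (none, none) (fun v => (none, v.2))        -- gr[0][0] = "False"
  let gr := gr.modify (n-1) (none, none) (fun v => (v.1, none))    -- gr[n-1][1] = "False"
  let s := cmd.foldl stepA (gr, ([] : List (Int × Option Int × Option Int)), some pivot)
  let answer := s.1.keys.foldl (fun a k => PySem.List.pySetD a k "O") (PySem.List.pyRepeat ["X"] n)
  PySem.Str.join "" answer

-- ===== PORT B =====
-- next((j for j in range(j0, n) if alive[j]), None)
def findFwd (al : List Bool) (n : Int) (j0 : Int) : Option Int :=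
  (PySem.List.pyRange j0 n 1).find? (fun j => PySem.List.pyGetD al j false)

-- next((j for j in range(j0, -1, -1) if alive[j]), None)
def findBwd (al : List Bool) (j0 : Int) : Option Int :=
  (PySem.List.pyRange j0 (-1) (-1)).find? (fun j => PySem.List.pyGetD al j false)

-- Source B's exhausted generators raise StopIteration: the port keeps the pivot unchanged
-- there; all such inputs are outside Pre_solution.
def stepB (n : Int) (s : List Bool × List Int × Int) (c : String) : List Bool × List Int × Int :=
  let (al, st, p) := s
  if PySem.Str.len c == 1 then
    if c == "Z" then
      match st with
      | [] => s  -- stack.pop() raises IndexError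
      | k :: rest => (PySem.List.pySetD al k true, rest, p)
    else
      let al' := PySem.List.pySetD al p false
      let p' := match findFwd al' n (p+1) with
        | some j => j
        | none => match findBwd al' (p-1) with
          | some j => j
          | none => p  -- StopIteration
      (al', p :: st, p')
  else
    match PySem.Str.split? c " " with
    | some [d, mv] =>
      match PySem.Int.ofStr? mv with
      | none => s  -- int() raises ValueError
      | some x =>
        if d == "D" then (al, st, (PySem.List.pyRange 0 x 1).foldl (fun q _ => (findFwd al n (q+1)).getD q) p)
        else (al, st, (PySem.List.pyRange 0 x 1).foldl (fun q _ => (findBwd al (q-1)).getD q) p)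
    | _ => s  -- unpacking raises ValueError

def solution_alt (n : Int) (pivot : Int) (cmd : List String) : String :=
  let s := cmd.foldl (stepB n) (PySem.List.pyRepeat [true] n, ([] : List Int), pivot)
  PySem.Str.join "" (s.1.map (fun a => if a then "O" else "X"))

-- ===== PRECONDITION & SPEC =====
-- Pre_solution holds exactly when the command script is legal in the sense of the original
-- problem statement: the table is nonempty, every command parses, 'Z' never undoes without
-- a prior delete, a delete never empties the table, and every pivot move lands on a live
-- row.  A returns normally on a slightly larger set: when the LAST step of a move runs off
-- the table A merely stores its "False" sentinel in `pivot` and still returns if no later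
-- command reads the pivot, while B's array scan raises StopIteration there; Pre_ excludes
-- that sentinel corner (see claim cites).  On everything else excluded here A raises
-- (KeyError/IndexError/ValueError).  The guarantee 'every move stays on the table' is a
-- property of the whole script, so it is checked by walking the commands over the set of
-- live rows (this validity walk is a condition on the input script, used only by Pre_).

-- The walk below keeps only the (short) list of currently deleted row indices and the
-- undo stack; it never materialises the n-element table, so it is cheap to decide.
def fwdDAux (dead : List Int) : Nat → Int → Option Int
  | 0, _ => none
  | f+1, j => if dead.contains j then fwdDAux dead f (j+1) else some j

def fwdD (n : Int) (dead : List Int) (j : Int) : Option Int := fwdDAux dead (n - j).toNat j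

def bwdDAux (dead : List Int) : Nat → Int → Option Int
  | 0, _ => none
  | f+1, j => if dead.contains j then bwdDAux dead f (j-1) else some j

def bwdD (dead : List Int) (j : Int) : Option Int := bwdDAux dead (j + 1).toNat j

def moveStepsD (n : Int) (dead : List Int) (dirD : Bool) : Nat → Int → Option Int
  | 0, p => some p
  | k+1, p =>
    if 0 ≤ p ∧ p < n ∧ dead.contains p = false then
      match (if dirD then fwdD n dead (p+1) else bwdD dead (p-1)) with
      | some j => moveStepsD n dead dirD k j
      | none => none
    else none

def validCmdsD (n : Int) : List Int → List Int → Int → List String → Bool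
  | _, _, _, [] => true
  | dead, st, p, c :: rest =>
    if PySem.Str.len c == 1 then
      if c == "Z" then
        match st with
        | [] => false
        | k :: st' => validCmdsD n (dead.erase k) st' p rest
      else
        if 0 ≤ p ∧ p < n ∧ dead.contains p = false then
          let dead' := p :: dead
          match fwdD n dead' (p+1) with
          | some j => validCmdsD n dead' (p :: st) j rest
          | none => match bwdD dead' (p-1) with
            | some j => validCmdsD n dead' (p :: st) j rest
            | none => false
        else false
    else
      match PySem.Str.split? c " " with
      | some [d, mv] =>
        match PySem.Int.ofStr? mv with
        | some x =>
          match moveStepsD n dead (d == "D") x.toNat p with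
          | some p' => validCmdsD n dead st p' rest
          | none => false
        | none => false
      | _ => false

def Pre_solution (n : Int) (pivot : Int) (cmd : List String) : Prop :=
  1 ≤ n ∧ validCmdsD n [] [] pivot cmd = true

instance (n : Int) (pivot : Int) (cmd : List String) : Decidable (Pre_solution n pivot cmd) := by
  unfold Pre_solution; infer_instance

def pvWitness_solution : Int × Int × List String := (4, 1, ["C", "D 1", "C", "Z", "U 1"])

def Spec_solution (n : Int) (pivot : Int) (cmd : List String) (out : String) : Prop := out = solution_alt n pivot cmd
instance (n : Int) (pivot : Int) (cmd : List String) (out : String) : Decidable (Spec_solution n pivot cmd out) := by unfold Spec_solution; infer_instance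

-- ===== CLAIM (what is proved, stated in full; the proofs are below) =====
def Claim_equal_solution : Prop := ∀ (n : Int) (pivot : Int) (cmd : List String), Dom_solution n pivot cmd → Pre_solution n pivot cmd → Spec_solution n pivot cmd (solution n pivot cmd)

-- ===== LEMMAS AND PROOFS =====

-- list-based twin of the Pre_ validity walk, used to run the simulation proof
def liveAt (al : List Bool) (i : Int) : Bool := PySem.List.pyGetD al i false

def moveSteps (n : Int) (al : List Bool) (dirD : Bool) : Nat → Int → Option Int
  | 0, p => some p
  | k+1, p =>
    if 0 ≤ p ∧ liveAt al p = true then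
      match (if dirD then findFwd al n (p+1) else findBwd al (p-1)) with
      | some j => moveSteps n al dirD k j
      | none => none
    else none

def validCmds (n : Int) : List Bool → List Int → Int → List String → Bool
  | _, _, _, [] => true
  | al, st, p, c :: rest =>
    if PySem.Str.len c == 1 then
      if c == "Z" then
        match st with
        | [] => false
        | k :: st' => validCmds n (PySem.List.pySetD al k true) st' p rest
      else
        if 0 ≤ p ∧ liveAt al p = true then
          let al' := PySem.List.pySetD al p false
          match findFwd al' n (p+1) with
          | some j => validCmds n al' (p :: st) j rest
          | none => match findBwd al' (p-1) with
            | some j => validCmds n al' (p :: st) j rest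
            | none => false
        else false
    else
      match PySem.Str.split? c " " with
      | some [d, mv] =>
        match PySem.Int.ofStr? mv with
        | some x =>
          match moveSteps n al (d == "D") x.toNat p with
          | some p' => validCmds n al st p' rest
          | none => false
        | none => false
      | _ => false


theorem length_pySetD {α : Type} (xs : List α) (i : Int) (v : α) :
    (PySem.List.pySetD xs i v).length = xs.length := by
  unfold PySem.List.pySetD PySem.List.pySet?
  cases h : PySem.List.pyIdx? xs.length i <;> simp [h]

theorem pyGetD_pySetD_self {α : Type} (xs : List α) (i : Int) (v d : α)
    (h0 : 0 ≤ i) (h1 : i.toNat < xs.length) :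
    PySem.List.pyGetD (PySem.List.pySetD xs i v) i d = v := by
  have hi : i < (xs.length : Int) := by omega
  unfold PySem.List.pySetD PySem.List.pySet? PySem.List.pyIdx?
  rw [if_pos h0, if_pos hi]
  rw [PySem.List.pyGetD_of_nonneg _ _ h0]
  simp [List.getD_eq_getElem?_getD, h1]

theorem pyGetD_pySetD_ne {α : Type} (xs : List α) (i j : Int) (v d : α)
    (hi : 0 ≤ i) (hj : 0 ≤ j) (hne : j ≠ i) :
    PySem.List.pyGetD (PySem.List.pySetD xs i v) j d = PySem.List.pyGetD xs j d := by
  by_cases hlen : i < (xs.length : Int)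
  · unfold PySem.List.pySetD PySem.List.pySet? PySem.List.pyIdx?
    rw [if_pos hi, if_pos hlen]
    rw [PySem.List.pyGetD_of_nonneg _ _ hj, PySem.List.pyGetD_of_nonneg _ _ hj]
    simp only [Option.getD_some, Option.map_some]
    rw [List.getD_eq_getElem?_getD, List.getD_eq_getElem?_getD]
    rw [List.getElem?_set_ne (by omega)]
  · unfold PySem.List.pySetD PySem.List.pySet? PySem.List.pyIdx?
    rw [if_pos hi, if_neg hlen]
    simp

theorem findFwd_nil (al : List Bool) (n j : Int) (h : n ≤ j) : findFwd al n j = none := by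
  unfold findFwd
  rw [PySem.List.pyRange_one_eq_nil h]
  rfl

theorem findFwd_cons (al : List Bool) (n j : Int) (h : j < n) :
    findFwd al n j = if liveAt al j then some j else findFwd al n (j+1) := by
  unfold findFwd liveAt
  rw [PySem.List.pyRange_one_cons h, List.find?_cons]
  cases h2 : PySem.List.pyGetD al j false <;> simp [h2]

theorem findBwd_nil (al : List Bool) (j : Int) (h : j < 0) : findBwd al j = none := by
  unfold findBwd
  rw [PySem.List.pyRange_neg_one_eq_nil (by omega)]
  rfl

theorem findBwd_cons (al : List Bool) (j : Int) (h : 0 ≤ j) :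
    findBwd al j = if liveAt al j then some j else findBwd al (j-1) := by
  unfold findBwd liveAt
  rw [PySem.List.pyRange_neg_one_cons (by omega), List.find?_cons]
  cases h2 : PySem.List.pyGetD al j false <;> simp [h2]

theorem findFwd_none_iff (al : List Bool) (n j : Int) :
    findFwd al n j = none ↔ ∀ m, j ≤ m → m < n → liveAt al m = false := by
  have H : ∀ t : Nat, ∀ j : Int, (n - j).toNat = t →
      (findFwd al n j = none ↔ ∀ m, j ≤ m → m < n → liveAt al m = false) := by
    intro t
    induction t with
    | zero =>
      intro j ht
      have hnj : n ≤ j := by omega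
      simp only [findFwd_nil al n j hnj, true_iff]
      exact fun m h1 h2 => absurd (lt_of_le_of_lt h1 h2) (by omega)
    | succ t ih =>
      intro j ht
      have hj : j < n := by omega
      rw [findFwd_cons al n j hj]
      by_cases hl : liveAt al j = true
      · simp only [hl, if_true]
        constructor
        · intro h; exact absurd h (by simp)
        · intro h; exact absurd (h j le_rfl hj) (by simp [hl])
      · have hl' : liveAt al j = false := by simpa using hl
        rw [hl', if_neg (by simp), ih (j+1) (by omega)]
        constructor
        · intro h m h1 h2
          rcases eq_or_lt_of_le h1 with he | hlt
          · exact he ▸ hl'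
          · exact h m (by omega) h2
        · exact fun h m h1 h2 => h m (by omega) h2
  exact H _ j rfl

theorem findFwd_some_iff (al : List Bool) (n j k : Int) :
    findFwd al n j = some k ↔
      j ≤ k ∧ k < n ∧ liveAt al k = true ∧ ∀ m, j ≤ m → m < k → liveAt al m = false := by
  have H : ∀ t : Nat, ∀ j : Int, (n - j).toNat = t →
      (findFwd al n j = some k ↔
        j ≤ k ∧ k < n ∧ liveAt al k = true ∧ ∀ m, j ≤ m → m < k → liveAt al m = false) := by
    intro t
    induction t with
    | zero =>
      intro j ht
      have hnj : n ≤ j := by omega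
      simp only [findFwd_nil al n j hnj]
      constructor
      · intro h; exact absurd h (by simp)
      · rintro ⟨h1, h2, _, _⟩; omega
    | succ t ih =>
      intro j ht
      have hj : j < n := by omega
      rw [findFwd_cons al n j hj]
      by_cases hl : liveAt al j = true
      · simp only [hl, if_true]
        constructor
        · intro h
          have hk : k = j := by injection h with h; omega
          subst hk
          exact ⟨le_rfl, hj, hl, fun m h1 h2 => absurd (lt_of_le_of_lt h1 h2) (by omega)⟩
        · rintro ⟨h1, h2, h3, h4⟩
          rcases eq_or_lt_of_le h1 with he | hlt
          · rw [he]
          · exact absurd (h4 j le_rfl hlt) (by simp [hl])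
      · have hl' : liveAt al j = false := by simpa using hl
        rw [hl', if_neg (by simp), ih (j+1) (by omega)]
        constructor
        · rintro ⟨h1, h2, h3, h4⟩
          refine ⟨by omega, h2, h3, fun m hm1 hm2 => ?_⟩
          rcases eq_or_lt_of_le hm1 with he | hlt
          · exact he ▸ hl'
          · exact h4 m (by omega) hm2
        · rintro ⟨h1, h2, h3, h4⟩
          have hjk : j ≠ k := by
            intro he; rw [← he] at h3; rw [hl'] at h3; exact Bool.false_ne_true h3
          exact ⟨by omega, h2, h3, fun m hm1 hm2 => h4 m (by omega) hm2⟩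
  exact H _ j rfl

theorem findBwd_none_iff (al : List Bool) (j : Int) :
    findBwd al j = none ↔ ∀ m, 0 ≤ m → m ≤ j → liveAt al m = false := by
  have H : ∀ t : Nat, ∀ j : Int, (j + 1).toNat = t →
      (findBwd al j = none ↔ ∀ m, 0 ≤ m → m ≤ j → liveAt al m = false) := by
    intro t
    induction t with
    | zero =>
      intro j ht
      have hnj : j < 0 := by omega
      simp only [findBwd_nil al j hnj, true_iff]
      exact fun m h1 h2 => absurd (le_trans h1 h2) (by omega)
    | succ t ih =>
      intro j ht
      have hj : 0 ≤ j := by omega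
      rw [findBwd_cons al j hj]
      by_cases hl : liveAt al j = true
      · simp only [hl, if_true]
        constructor
        · intro h; exact absurd h (by simp)
        · intro h; exact absurd (h j hj le_rfl) (by simp [hl])
      · have hl' : liveAt al j = false := by simpa using hl
        rw [hl', if_neg (by simp), ih (j-1) (by omega)]
        constructor
        · intro h m h1 h2
          rcases eq_or_lt_of_le h2 with he | hlt
          · exact he ▸ hl'
          · exact h m h1 (by omega)
        · exact fun h m h1 h2 => h m h1 (by omega)
  exact H _ j rfl

theorem findBwd_some_iff (al : List Bool) (j k : Int) :
    findBwd al j = some k ↔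
      0 ≤ k ∧ k ≤ j ∧ liveAt al k = true ∧ ∀ m, k < m → m ≤ j → liveAt al m = false := by
  have H : ∀ t : Nat, ∀ j : Int, (j + 1).toNat = t →
      (findBwd al j = some k ↔
        0 ≤ k ∧ k ≤ j ∧ liveAt al k = true ∧ ∀ m, k < m → m ≤ j → liveAt al m = false) := by
    intro t
    induction t with
    | zero =>
      intro j ht
      have hnj : j < 0 := by omega
      simp only [findBwd_nil al j hnj]
      constructor
      · intro h; exact absurd h (by simp)
      · rintro ⟨h1, h2, _, _⟩; omega
    | succ t ih =>
      intro j ht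
      have hj : 0 ≤ j := by omega
      rw [findBwd_cons al j hj]
      by_cases hl : liveAt al j = true
      · simp only [hl, if_true]
        constructor
        · intro h
          have hk : k = j := by injection h with h; omega
          subst hk
          exact ⟨hj, le_rfl, hl, fun m h1 h2 => by omega⟩
        · rintro ⟨h1, h2, h3, h4⟩
          rcases eq_or_lt_of_le h2 with he | hlt
          · rw [he]
          · exact absurd (h4 j hlt le_rfl) (by simp [hl])
      · have hl' : liveAt al j = false := by simpa using hl
        rw [hl', if_neg (by simp), ih (j-1) (by omega)]
        constructor
        · rintro ⟨h1, h2, h3, h4⟩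
          refine ⟨h1, by omega, h3, fun m hm1 hm2 => ?_⟩
          rcases eq_or_lt_of_le hm2 with he | hlt
          · exact he ▸ hl'
          · exact h4 m hm1 (by omega)
        · rintro ⟨h1, h2, h3, h4⟩
          have hjk : j ≠ k := by
            intro he; rw [← he] at h3; rw [hl'] at h3; exact Bool.false_ne_true h3
          exact ⟨h1, by omega, h3, fun m hm1 hm2 => h4 m hm1 (by omega)⟩
  exact H _ j rfl


-- ---- scan congruence and update lemmas ----

theorem liveAt_lt_length (al : List Bool) (p : Int) (h : liveAt al p = true) (h0 : 0 ≤ p) :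
    p < (al.length : Int) := by
  by_contra hge
  rw [liveAt, PySem.List.pyGetD_of_nonneg _ _ h0, List.getD_eq_getElem?_getD,
    List.getElem?_eq_none (by omega)] at h
  exact Bool.false_ne_true h

theorem findFwd_congr (al1 al2 : List Bool) (n j : Int)
    (h : ∀ m, j ≤ m → m < n → liveAt al1 m = liveAt al2 m) :
    findFwd al1 n j = findFwd al2 n j := by
  cases h2 : findFwd al2 n j with
  | none =>
    rw [findFwd_none_iff] at h2 ⊢
    intro m h1 h1'
    rw [h m h1 h1']; exact h2 m h1 h1'
  | some k =>
    rw [findFwd_some_iff] at h2 ⊢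
    obtain ⟨a, b, c, d⟩ := h2
    exact ⟨a, b, by rw [h k a b]; exact c, fun m h1 h1' => by
      rw [h m h1 (by omega)]; exact d m h1 h1'⟩

theorem findBwd_congr (al1 al2 : List Bool) (j : Int)
    (h : ∀ m, 0 ≤ m → m ≤ j → liveAt al1 m = liveAt al2 m) :
    findBwd al1 j = findBwd al2 j := by
  cases h2 : findBwd al2 j with
  | none =>
    rw [findBwd_none_iff] at h2 ⊢
    intro m h1 h1'
    rw [h m h1 h1']; exact h2 m h1 h1'
  | some k =>
    rw [findBwd_some_iff] at h2 ⊢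
    obtain ⟨a, b, c, d⟩ := h2
    exact ⟨a, b, by rw [h k a b]; exact c, fun m h1 h1' => by
      rw [h m (by omega) h1']; exact d m h1 h1'⟩

-- liveAt after pySetD
theorem liveAt_pySetD_self (al : List Bool) (p : Int) (v : Bool)
    (h0 : 0 ≤ p) (h1 : p < (al.length : Int)) :
    liveAt (PySem.List.pySetD al p v) p = v :=
  pyGetD_pySetD_self al p v false h0 (by omega)

theorem liveAt_pySetD_ne (al : List Bool) (p i : Int) (v : Bool)
    (hp : 0 ≤ p) (hi : 0 ≤ i) (hne : i ≠ p) :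
    liveAt (PySem.List.pySetD al p v) i = liveAt al i :=
  pyGetD_pySetD_ne al p i v false hp hi hne

theorem liveAt_true_elim (al : List Bool) (p : Int) (h : liveAt al p = true) (h0 : 0 ≤ p) :
    ∃ hp : p.toNat < al.length, al[p.toNat] = true := by
  rw [liveAt, PySem.List.pyGetD_of_nonneg _ _ h0, List.getD_eq_getElem?_getD] at h
  by_cases hlt : p.toNat < al.length
  · exact ⟨hlt, by rw [List.getElem?_eq_getElem hlt] at h; simpa using h⟩
  · rw [List.getElem?_eq_none (by omega)] at h; exact absurd h (by simp)

theorem liveAt_pySetD_false (al : List Bool) (p : Int) (hp : 0 ≤ p) :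
    liveAt (PySem.List.pySetD al p false) p = false := by
  by_cases hlt : p < (al.length : Int)
  · exact liveAt_pySetD_self al p false hp hlt
  · rw [liveAt]
    unfold PySem.List.pySetD PySem.List.pySet? PySem.List.pyIdx?
    rw [if_pos hp, if_neg hlt]
    simp only [Option.map_none, Option.getD_none]
    rw [PySem.List.pyGetD_of_nonneg _ _ hp, List.getD_eq_getElem?_getD,
      List.getElem?_eq_none (by omega)]
    rfl

theorem pySetD_same (al : List Bool) (p : Int) (h : liveAt al p = true) (h0 : 0 ≤ p) :
    PySem.List.pySetD al p true = al := by
  obtain ⟨hp, hval⟩ := liveAt_true_elim al p h h0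
  have hi : p < (al.length : Int) := by omega
  unfold PySem.List.pySetD PySem.List.pySet? PySem.List.pyIdx?
  rw [if_pos h0, if_pos hi]
  simp only [Option.map_some, Option.getD_some]
  apply List.ext_getElem (by simp)
  intro idx h1 h2
  rw [List.getElem_set]
  split
  · next he => subst he; exact hval.symm
  · rfl

theorem pySetD_pySetD (al : List Bool) (p : Int) (v w : Bool) (h0 : 0 ≤ p) :
    PySem.List.pySetD (PySem.List.pySetD al p v) p w = PySem.List.pySetD al p w := by
  by_cases hlt : p < (al.length : Int)
  · unfold PySem.List.pySetD PySem.List.pySet? PySem.List.pyIdx?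
    rw [if_pos h0, if_pos hlt]
    simp only [Option.map_some, Option.getD_some, List.length_set]
    rw [if_pos h0, if_pos hlt]
    simp [List.set_set]
  · unfold PySem.List.pySetD PySem.List.pySet? PySem.List.pyIdx?
    rw [if_pos h0, if_neg hlt]
    simp only [Option.map_none, Option.getD_none]
    rw [if_pos h0, if_neg hlt]
    simp

-- adjacency symmetry
theorem adj_fwd_bwd (al : List Bool) (n i p : Int) (hi0 : 0 ≤ i) (hil : liveAt al i = true)
    (h : findFwd al n (i+1) = some p) : findBwd al (p-1) = some i := by
  rw [findFwd_some_iff] at h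
  obtain ⟨a, b, c, d⟩ := h
  rw [findBwd_some_iff]
  exact ⟨hi0, by omega, hil, fun m h1 h2 => d m (by omega) (by omega)⟩

theorem adj_bwd_fwd (al : List Bool) (n i p : Int) (hin : i < n) (hil : liveAt al i = true)
    (h : findBwd al (i-1) = some p) : findFwd al n (p+1) = some i := by
  rw [findBwd_some_iff] at h
  obtain ⟨a, b, c, d⟩ := h
  rw [findFwd_some_iff]
  exact ⟨by omega, hin, hil, fun m h1 h2 => d m (by omega) (by omega)⟩

-- scans after killing p (al' = pySetD al p false)
theorem fwd_kill_high (al : List Bool) (n p j : Int) (hp : 0 ≤ p) (hj : p < j) :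
    findFwd (PySem.List.pySetD al p false) n j = findFwd al n j :=
  findFwd_congr _ _ _ _ (fun m h1 _ => liveAt_pySetD_ne al p m false hp (by omega) (by omega))

theorem bwd_kill_low (al : List Bool) (p j : Int) (hp : 0 ≤ p) (hj : j < p) :
    findBwd (PySem.List.pySetD al p false) j = findBwd al j :=
  findBwd_congr _ _ _ (fun m h1 h2 => liveAt_pySetD_ne al p m false hp h1 (by omega))

theorem fwd_kill_miss (al : List Bool) (n p j m : Int) (hp : 0 ≤ p) (hj : 0 ≤ j)
    (h : findFwd al n j = some m) (hne : m ≠ p) :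
    findFwd (PySem.List.pySetD al p false) n j = some m := by
  rw [findFwd_some_iff] at h ⊢
  obtain ⟨h1, h2, h3, h4⟩ := h
  refine ⟨h1, h2, ?_, ?_⟩
  · rw [liveAt_pySetD_ne al p m false hp (by omega) hne]; exact h3
  · intro q hq1 hq2
    by_cases hqp : q = p
    · rw [hqp]
      exact liveAt_pySetD_false al p hp
    · rw [liveAt_pySetD_ne al p q false hp (by omega) hqp]
      exact h4 q hq1 hq2

theorem fwd_kill_none (al : List Bool) (n p j : Int) (hp : 0 ≤ p) (hj : 0 ≤ j)
    (h : findFwd al n j = none) :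
    findFwd (PySem.List.pySetD al p false) n j = none := by
  rw [findFwd_none_iff] at h ⊢
  intro m hm1 hm2
  by_cases hmp : m = p
  · rw [hmp]
    exact liveAt_pySetD_false al p hp
  · rw [liveAt_pySetD_ne al p m false hp (by omega) hmp]
    exact h m hm1 hm2

theorem bwd_kill_miss (al : List Bool) (p j m : Int) (hp : 0 ≤ p)
    (h : findBwd al j = some m) (hne : m ≠ p) :
    findBwd (PySem.List.pySetD al p false) j = some m := by
  rw [findBwd_some_iff] at h ⊢
  obtain ⟨h1, h2, h3, h4⟩ := h
  refine ⟨h1, h2, ?_, ?_⟩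
  · rw [liveAt_pySetD_ne al p m false hp h1 hne]; exact h3
  · intro q hq1 hq2
    by_cases hqp : q = p
    · rw [hqp]
      exact liveAt_pySetD_false al p hp
    · rw [liveAt_pySetD_ne al p q false hp (by omega) hqp]
      exact h4 q hq1 hq2

theorem bwd_kill_none (al : List Bool) (p j : Int) (hp : 0 ≤ p)
    (h : findBwd al j = none) :
    findBwd (PySem.List.pySetD al p false) j = none := by
  rw [findBwd_none_iff] at h ⊢
  intro m hm1 hm2
  by_cases hmp : m = p
  · rw [hmp]
    exact liveAt_pySetD_false al p hp
  · rw [liveAt_pySetD_ne al p m false hp hm1 hmp]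
    exact h m hm1 hm2

-- scans after reviving k (T = pySetD al k true), where al is the current (k-dead) list
theorem fwd_revive_high (al : List Bool) (n k j : Int) (hk : 0 ≤ k) (hj : k < j) :
    findFwd (PySem.List.pySetD al k true) n j = findFwd al n j :=
  findFwd_congr _ _ _ _ (fun m h1 _ => liveAt_pySetD_ne al k m true hk (by omega) (by omega))

theorem bwd_revive_low (al : List Bool) (k j : Int) (hk : 0 ≤ k) (hj : j < k) :
    findBwd (PySem.List.pySetD al k true) j = findBwd al j :=
  findBwd_congr _ _ _ (fun m h1 h2 => liveAt_pySetD_ne al k m true hk h1 (by omega))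

-- replicate
theorem liveAt_replicate (n i : Int) (h0 : 0 ≤ i) :
    liveAt (PySem.List.pyRepeat [true] n) i = decide (i < n) := by
  rw [liveAt, PySem.List.pyRepeat_singleton, PySem.List.pyGetD_of_nonneg _ _ h0,
    List.getD_eq_getElem?_getD]
  by_cases hlt : i.toNat < n.toNat
  · rw [List.getElem?_eq_getElem (by simp only [List.length_replicate]; omega)]
    simp only [List.getElem_replicate, Option.getD_some]
    have : i < n := by omega
    simp [this]
  · rw [List.getElem?_eq_none (by simp only [List.length_replicate]; omega)]
    have : ¬ i < n := by omega
    simp [this]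

theorem findFwd_replicate (n j : Int) (h0 : 0 ≤ j) :
    findFwd (PySem.List.pyRepeat [true] n) n j = if j < n then some j else none := by
  by_cases hlt : j < n
  · rw [findFwd_cons _ _ _ hlt, liveAt_replicate n j h0, if_pos hlt]
    simp [hlt]
  · rw [findFwd_nil _ _ _ (by omega), if_neg hlt]

theorem findBwd_replicate (n j : Int) (hn : j < n) :
    findBwd (PySem.List.pyRepeat [true] n) j = if 0 ≤ j then some j else none := by
  by_cases h0 : 0 ≤ j
  · rw [findBwd_cons _ _ h0, liveAt_replicate n j h0, if_pos h0]
    simp [hn]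
  · rw [findBwd_nil _ _ (by omega), if_neg h0]

-- ---- dict lemmas ----

theorem find?_filter_ne {ν : Type} (l : List (Int × ν)) (k i : Int) :
    (l.filter (fun p => !(p.1 == k))).find? (fun p => p.1 == i) =
      if i = k then none else l.find? (fun p => p.1 == i) := by
  induction l with
  | nil => simp only [List.filter_nil, List.find?_nil]; split <;> rfl
  | cons hd tl ih =>
    by_cases h1 : hd.1 = k
    · rw [List.filter_cons_of_neg (by simp [h1])]
      rw [ih]
      by_cases h2 : i = k
      · rw [if_pos h2, if_pos h2]
      · rw [if_neg h2, if_neg h2, List.find?_cons_of_neg (by simp [h1]; omega)]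
    · rw [List.filter_cons_of_pos (by simp [h1])]
      by_cases h2 : hd.1 = i
      · rw [List.find?_cons_of_pos (by simp [h2]), if_neg (by omega),
          List.find?_cons_of_pos (by simp [h2])]
      · rw [List.find?_cons_of_neg (by simp [h2]), ih]
        by_cases h3 : i = k
        · rw [if_pos h3, if_pos h3]
        · rw [if_neg h3, if_neg h3, List.find?_cons_of_neg (by simp [h2])]

theorem get?_erase {ν : Type} (d : PySem.Dict Int ν) (k i : Int) :
    (d.erase k).get? i = if i = k then none else d.get? i := by
  unfold PySem.Dict.erase PySem.Dict.get?
  rw [find?_filter_ne]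
  split <;> rfl

theorem get?_modify {ν : Type} (d : PySem.Dict Int ν) (k : Int) (dflt : ν) (f : ν → ν) (i : Int) :
    (d.modify k dflt f).get? i = if i = k then some (f (d.getD k dflt)) else d.get? i := by
  unfold PySem.Dict.modify
  rw [PySem.Dict.get?_insert]

theorem nodup_keys_erase {ν : Type} (d : PySem.Dict Int ν) (k : Int)
    (h : d.keys.Nodup) : (d.erase k).keys.Nodup := by
  have hsub : (d.erase k).keys.Sublist d.keys :=
    List.Sublist.map _ List.filter_sublist
  exact h.sublist hsub

theorem nodup_keys_modify {ν : Type} (d : PySem.Dict Int ν) (k : Int) (dflt : ν) (f : ν → ν)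
    (h : d.keys.Nodup) : (d.modify k dflt f).keys.Nodup :=
  PySem.Dict.nodup_keys_insert _ _ _ h

-- ---- the simulation invariant ----

-- the dict is exactly the doubly linked list of the live rows
def CharOf (n : Int) (gr : PySem.Dict Int (Option Int × Option Int)) (al : List Bool) : Prop :=
  ∀ i : Int, gr.get? i =
    if 0 ≤ i ∧ i < n ∧ liveAt al i = true
    then some (findBwd al (i-1), findFwd al n (i+1))
    else none

-- the garbage stack, replayed top-down, re-creates the live sets in which each stored
-- neighbour pair was taken
def GOK (n : Int) : List Bool → List (Int × Option Int × Option Int) → Prop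
  | _, [] => True
  | al, (k, l, r) :: rest =>
      0 ≤ k ∧ k < n ∧ liveAt al k = false ∧
      l = findBwd (PySem.List.pySetD al k true) (k-1) ∧
      r = findFwd (PySem.List.pySetD al k true) n (k+1) ∧
      (l.isSome ∨ r.isSome) ∧ GOK n (PySem.List.pySetD al k true) rest

def SimInv (n : Int) (sA : PySem.Dict Int (Option Int × Option Int) × List (Int × Option Int × Option Int) × Option Int)
    (sB : List Bool × List Int × Int) : Prop :=
  sB.1.length = n.toNat ∧ sA.2.2 = some sB.2.2 ∧ sA.2.1.map (fun e => e.1) = sB.2.1 ∧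
  sA.1.keys.Nodup ∧ CharOf n sA.1 sB.1 ∧ GOK n sB.1 sA.2.1

-- ---- step lemmas ----

theorem foldl_const {α β : Type} (l : List β) (g : α → α) (init : α) :
    l.foldl (fun q _ => g q) init = g^[l.length] init := by
  induction l generalizing init with
  | nil => rfl
  | cons x xs ih => simp [List.foldl_cons, ih, Function.iterate_succ_apply]

theorem move_agree (n : Int) (gr : PySem.Dict Int (Option Int × Option Int)) (al : List Bool)
    (hlen : al.length = n.toNat) (hChar : CharOf n gr al) (dirD : Bool) :
    ∀ (k : Nat) (p p' : Int), moveSteps n al dirD k p = some p' →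
      ((fun pv => if dirD then stepRA gr pv else stepLA gr pv)^[k] (some p) = some p' ∧
       (fun q => if dirD then (findFwd al n (q+1)).getD q else (findBwd al (q-1)).getD q)^[k] p = p') := by
  intro k
  induction k with
  | zero =>
    intro p p' h
    simp only [moveSteps] at h
    injection h with h
    subst h
    exact ⟨rfl, rfl⟩
  | succ k ih =>
    intro p p' h
    simp only [moveSteps] at h
    by_cases hc : 0 ≤ p ∧ liveAt al p = true
    · rw [if_pos hc] at h
      obtain ⟨hp0, hpl⟩ := hc
      have hpn : p < n := by
        have := liveAt_lt_length al p hpl hp0; omega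
      have hgr : gr.get? p = some (findBwd al (p-1), findFwd al n (p+1)) := by
        have hx := hChar p; rw [if_pos ⟨hp0, hpn, hpl⟩] at hx; exact hx
      cases hf : (if dirD then findFwd al n (p+1) else findBwd al (p-1)) with
      | none => rw [hf] at h; exact absurd h (by simp)
      | some j =>
        rw [hf] at h
        have hA : (if dirD then stepRA gr (some p) else stepLA gr (some p)) = some j := by
          cases dirD
          · simp only [Bool.false_eq_true, if_false] at hf ⊢
            simp only [stepLA, hgr]
            exact hf
          · simp only [if_true] at hf ⊢
            simp only [stepRA, hgr]
            exact hf
        have hB : (if dirD then (findFwd al n (p+1)).getD p else (findBwd al (p-1)).getD p) = j := by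
          cases dirD
          · simp only [Bool.false_eq_true, if_false] at hf ⊢
            rw [hf]; rfl
          · simp only [if_true] at hf ⊢
            rw [hf]; rfl
        obtain ⟨ihA, ihB⟩ := ih j p' h
        constructor
        · rw [Function.iterate_succ_apply, hA]; exact ihA
        · rw [Function.iterate_succ_apply, hB]; exact ihB
    · rw [if_neg hc] at h
      exact absurd h (by simp)

theorem char_delete (n : Int) (gr : PySem.Dict Int (Option Int × Option Int)) (al : List Bool)
    (p : Int) (hlen : al.length = n.toNat) (hChar : CharOf n gr al)
    (hp0 : 0 ≤ p) (hpl : liveAt al p = true)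
    (hnn : ¬(findBwd al (p-1) = none ∧ findFwd al n (p+1) = none)) :
    ∀ i : Int,
      (match findBwd al (p-1), findFwd al n (p+1) with
        | none, none => gr
        | none, some r => (gr.modify r (none, none) (fun v => (none, v.2))).erase p
        | some l, none => (gr.modify l (none, none) (fun v => (v.1, none))).erase p
        | some l, some r =>
            ((gr.modify l (none, none) (fun v => (v.1, findFwd al n (p+1)))).modify r (none, none)
              (fun v => (findBwd al (p-1), v.2))).erase p).get? i =
      (if 0 ≤ i ∧ i < n ∧ liveAt (PySem.List.pySetD al p false) i = true
       then some (findBwd (PySem.List.pySetD al p false) (i-1),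
                  findFwd (PySem.List.pySetD al p false) n (i+1))
       else none) := by
  intro i
  have hplen : p < (al.length : Int) := liveAt_lt_length al p hpl hp0
  have hpn : p < n := by omega
  have hALp : liveAt (PySem.List.pySetD al p false) p = false := liveAt_pySetD_false al p hp0
  have hALne : ∀ q, 0 ≤ q → q ≠ p →
      liveAt (PySem.List.pySetD al p false) q = liveAt al q :=
    fun q hq hne => liveAt_pySetD_ne al p q false hp0 hq hne
  cases hl0 : findBwd al (p-1) with
  | none =>
    cases hr0 : findFwd al n (p+1) with
    | none => exact absurd ⟨hl0, hr0⟩ hnn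
    | some r =>
      have hld := (findBwd_none_iff al (p-1)).mp hl0
      have hrr := (findFwd_some_iff al n (p+1) r).mp hr0
      obtain ⟨hr1, hr2, hr3, hr4⟩ := hrr
      rw [get?_erase, get?_modify]
      by_cases hip : i = p
      · rw [if_pos hip,
          if_neg (by rw [hip]; rintro ⟨_, _, hlv⟩; rw [hALp] at hlv; exact Bool.false_ne_true hlv)]
      · rw [if_neg hip]
        by_cases hir : i = r
        · have hgr_r : gr.get? r = some (findBwd al (r-1), findFwd al n (r+1)) := by
            have hx := hChar r; rw [if_pos ⟨by omega, hr2, hr3⟩] at hx; exact hx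
          rw [if_pos hir, PySem.Dict.getD_eq_get?_getD, hgr_r]
          have hcond : 0 ≤ i ∧ i < n ∧ liveAt (PySem.List.pySetD al p false) i = true := by
            refine ⟨by omega, by omega, ?_⟩
            rw [hALne i (by omega) hip, hir]; exact hr3
          rw [if_pos hcond, hir]
          have hfst : findBwd (PySem.List.pySetD al p false) (r-1) = none := by
            rw [findBwd_none_iff]
            intro m hm1 hm2
            by_cases hmp : m = p
            · rw [hmp]; exact hALp
            · rw [hALne m hm1 hmp]
              rcases lt_or_ge m p with hc | hc
              · exact hld m hm1 (by omega)
              · exact hr4 m (by omega) (by omega)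
          have hsnd : findFwd (PySem.List.pySetD al p false) n (r+1) = findFwd al n (r+1) :=
            fwd_kill_high al n p (r+1) hp0 (by omega)
          rw [hfst, hsnd]; rfl
        · rw [if_neg hir, hChar i]
          by_cases hca : 0 ≤ i ∧ i < n ∧ liveAt al i = true
          · obtain ⟨hi0, hin, hil⟩ := hca
            rw [if_pos ⟨hi0, hin, hil⟩,
              if_pos ⟨hi0, hin, by rw [hALne i hi0 hip]; exact hil⟩]
            have hbwd : findBwd (PySem.List.pySetD al p false) (i-1) = findBwd al (i-1) := by
              rcases lt_or_ge i p with hc | hc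
              · exact bwd_kill_low al p (i-1) hp0 (by omega)
              · cases hbo : findBwd al (i-1) with
                | none => exact bwd_kill_none al p (i-1) hp0 hbo
                | some m =>
                  by_cases hmp : m = p
                  · exfalso
                    rw [hmp] at hbo
                    have := adj_bwd_fwd al n i p hin hil hbo
                    rw [hr0] at this
                    injection this with this
                    exact hir this.symm
                  · exact bwd_kill_miss al p (i-1) m hp0 hbo hmp
            have hfwd : findFwd (PySem.List.pySetD al p false) n (i+1) = findFwd al n (i+1) := by
              rcases lt_or_ge p i with hc | hc
              · exact fwd_kill_high al n p (i+1) hp0 (by omega)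
              · cases hfo : findFwd al n (i+1) with
                | none => exact fwd_kill_none al n p (i+1) hp0 (by omega) hfo
                | some m =>
                  by_cases hmp : m = p
                  · exfalso
                    rw [hmp] at hfo
                    have := adj_fwd_bwd al n i p hi0 hil hfo
                    rw [hl0] at this
                    simp at this
                  · exact fwd_kill_miss al n p (i+1) m hp0 (by omega) hfo hmp
            rw [hbwd, hfwd]
          · rw [if_neg hca,
              if_neg (fun hc' => hca ⟨hc'.1, hc'.2.1, by rw [← hALne i hc'.1 hip]; exact hc'.2.2⟩)]
  | some l =>
    have hll := (findBwd_some_iff al (p-1) l).mp hl0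
    obtain ⟨hl1, hl2, hl3, hl4⟩ := hll
    cases hr0 : findFwd al n (p+1) with
    | none =>
      have hrd := (findFwd_none_iff al n (p+1)).mp hr0
      rw [get?_erase, get?_modify]
      by_cases hip : i = p
      · rw [if_pos hip,
          if_neg (by rw [hip]; rintro ⟨_, _, hlv⟩; rw [hALp] at hlv; exact Bool.false_ne_true hlv)]
      · rw [if_neg hip]
        by_cases hil' : i = l
        · have hgr_l : gr.get? l = some (findBwd al (l-1), findFwd al n (l+1)) := by
            have hx := hChar l; rw [if_pos ⟨hl1, by omega, hl3⟩] at hx; exact hx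
          rw [if_pos hil', PySem.Dict.getD_eq_get?_getD, hgr_l]
          have hcond : 0 ≤ i ∧ i < n ∧ liveAt (PySem.List.pySetD al p false) i = true := by
            refine ⟨by omega, by omega, ?_⟩
            rw [hALne i (by omega) hip, hil']; exact hl3
          rw [if_pos hcond, hil']
          have hfst : findBwd (PySem.List.pySetD al p false) (l-1) = findBwd al (l-1) :=
            bwd_kill_low al p (l-1) hp0 (by omega)
          have hsnd : findFwd (PySem.List.pySetD al p false) n (l+1) = none := by
            rw [findFwd_none_iff]
            intro m hm1 hm2
            by_cases hmp : m = p
            · rw [hmp]; exact hALp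
            · rw [hALne m (by omega) hmp]
              rcases lt_or_ge m p with hc | hc
              · exact hl4 m (by omega) (by omega)
              · exact hrd m (by omega) hm2
          rw [hfst, hsnd]; rfl
        · rw [if_neg hil', hChar i]
          by_cases hca : 0 ≤ i ∧ i < n ∧ liveAt al i = true
          · obtain ⟨hi0, hin, hil⟩ := hca
            rw [if_pos ⟨hi0, hin, hil⟩,
              if_pos ⟨hi0, hin, by rw [hALne i hi0 hip]; exact hil⟩]
            have hbwd : findBwd (PySem.List.pySetD al p false) (i-1) = findBwd al (i-1) := by
              rcases lt_or_ge i p with hc | hc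
              · exact bwd_kill_low al p (i-1) hp0 (by omega)
              · cases hbo : findBwd al (i-1) with
                | none => exact bwd_kill_none al p (i-1) hp0 hbo
                | some m =>
                  by_cases hmp : m = p
                  · exfalso
                    rw [hmp] at hbo
                    have := adj_bwd_fwd al n i p hin hil hbo
                    rw [hr0] at this
                    simp at this
                  · exact bwd_kill_miss al p (i-1) m hp0 hbo hmp
            have hfwd : findFwd (PySem.List.pySetD al p false) n (i+1) = findFwd al n (i+1) := by
              rcases lt_or_ge p i with hc | hc
              · exact fwd_kill_high al n p (i+1) hp0 (by omega)
              · cases hfo : findFwd al n (i+1) with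
                | none => exact fwd_kill_none al n p (i+1) hp0 (by omega) hfo
                | some m =>
                  by_cases hmp : m = p
                  · exfalso
                    rw [hmp] at hfo
                    have := adj_fwd_bwd al n i p hi0 hil hfo
                    rw [hl0] at this
                    injection this with this
                    exact hil' this.symm
                  · exact fwd_kill_miss al n p (i+1) m hp0 (by omega) hfo hmp
            rw [hbwd, hfwd]
          · rw [if_neg hca,
              if_neg (fun hc' => hca ⟨hc'.1, hc'.2.1, by rw [← hALne i hc'.1 hip]; exact hc'.2.2⟩)]
    | some r =>
      have hrr := (findFwd_some_iff al n (p+1) r).mp hr0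
      obtain ⟨hr1, hr2, hr3, hr4⟩ := hrr
      have hlr : l ≠ r := by omega
      rw [get?_erase, get?_modify, get?_modify]
      by_cases hip : i = p
      · rw [if_pos hip,
          if_neg (by rw [hip]; rintro ⟨_, _, hlv⟩; rw [hALp] at hlv; exact Bool.false_ne_true hlv)]
      · rw [if_neg hip]
        by_cases hir : i = r
        · have hgr_r : gr.get? r = some (findBwd al (r-1), findFwd al n (r+1)) := by
            have hx := hChar r; rw [if_pos ⟨by omega, hr2, hr3⟩] at hx; exact hx
          rw [if_pos hir, PySem.Dict.getD_eq_get?_getD, get?_modify,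
            if_neg (by omega : r ≠ l), hgr_r]
          have hcond : 0 ≤ i ∧ i < n ∧ liveAt (PySem.List.pySetD al p false) i = true := by
            refine ⟨by omega, by omega, ?_⟩
            rw [hALne i (by omega) hip, hir]; exact hr3
          rw [if_pos hcond, hir]
          have hfst : findBwd (PySem.List.pySetD al p false) (r-1) = some l := by
            rw [findBwd_some_iff]
            refine ⟨hl1, by omega, by rw [hALne l hl1 (by omega)]; exact hl3, ?_⟩
            intro m hm1 hm2
            by_cases hmp : m = p
            · rw [hmp]; exact hALp
            · rw [hALne m (by omega) hmp]
              rcases lt_or_ge m p with hc | hc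
              · exact hl4 m hm1 (by omega)
              · exact hr4 m (by omega) (by omega)
          have hsnd : findFwd (PySem.List.pySetD al p false) n (r+1) = findFwd al n (r+1) :=
            fwd_kill_high al n p (r+1) hp0 (by omega)
          rw [hfst, hsnd]; rfl
        · rw [if_neg hir]
          by_cases hil' : i = l
          · have hgr_l : gr.get? l = some (findBwd al (l-1), findFwd al n (l+1)) := by
              have hx := hChar l; rw [if_pos ⟨hl1, by omega, hl3⟩] at hx; exact hx
            rw [if_pos hil', PySem.Dict.getD_eq_get?_getD, hgr_l]
            have hcond : 0 ≤ i ∧ i < n ∧ liveAt (PySem.List.pySetD al p false) i = true := by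
              refine ⟨by omega, by omega, ?_⟩
              rw [hALne i (by omega) hip, hil']; exact hl3
            rw [if_pos hcond, hil']
            have hfst : findBwd (PySem.List.pySetD al p false) (l-1) = findBwd al (l-1) :=
              bwd_kill_low al p (l-1) hp0 (by omega)
            have hsnd : findFwd (PySem.List.pySetD al p false) n (l+1) = some r := by
              rw [findFwd_some_iff]
              refine ⟨by omega, hr2, by rw [hALne r (by omega) (by omega)]; exact hr3, ?_⟩
              intro m hm1 hm2
              by_cases hmp : m = p
              · rw [hmp]; exact hALp
              · rw [hALne m (by omega) hmp]
                rcases lt_or_ge m p with hc | hc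
                · exact hl4 m (by omega) (by omega)
                · exact hr4 m (by omega) hm2
            rw [hfst, hsnd]; rfl
          · rw [if_neg hil', hChar i]
            by_cases hca : 0 ≤ i ∧ i < n ∧ liveAt al i = true
            · obtain ⟨hi0, hin, hil⟩ := hca
              rw [if_pos ⟨hi0, hin, hil⟩,
                if_pos ⟨hi0, hin, by rw [hALne i hi0 hip]; exact hil⟩]
              have hbwd : findBwd (PySem.List.pySetD al p false) (i-1) = findBwd al (i-1) := by
                rcases lt_or_ge i p with hc | hc
                · exact bwd_kill_low al p (i-1) hp0 (by omega)
                · cases hbo : findBwd al (i-1) with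
                  | none => exact bwd_kill_none al p (i-1) hp0 hbo
                  | some m =>
                    by_cases hmp : m = p
                    · exfalso
                      rw [hmp] at hbo
                      have := adj_bwd_fwd al n i p hin hil hbo
                      rw [hr0] at this
                      injection this with this
                      exact hir this.symm
                    · exact bwd_kill_miss al p (i-1) m hp0 hbo hmp
              have hfwd : findFwd (PySem.List.pySetD al p false) n (i+1) = findFwd al n (i+1) := by
                rcases lt_or_ge p i with hc | hc
                · exact fwd_kill_high al n p (i+1) hp0 (by omega)
                · cases hfo : findFwd al n (i+1) with
                  | none => exact fwd_kill_none al n p (i+1) hp0 (by omega) hfo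
                  | some m =>
                    by_cases hmp : m = p
                    · exfalso
                      rw [hmp] at hfo
                      have := adj_fwd_bwd al n i p hi0 hil hfo
                      rw [hl0] at this
                      injection this with this
                      exact hil' this.symm
                    · exact fwd_kill_miss al n p (i+1) m hp0 (by omega) hfo hmp
              rw [hbwd, hfwd]
            · rw [if_neg hca,
                if_neg (fun hc' => hca ⟨hc'.1, hc'.2.1, by rw [← hALne i hc'.1 hip]; exact hc'.2.2⟩)]

theorem bwd_revive_eq (al : List Bool) (k j : Int) (hk0 : 0 ≤ k)
    (hex : ∃ r, k < r ∧ r ≤ j ∧ liveAt al r = true) :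
    findBwd (PySem.List.pySetD al k true) j = findBwd al j := by
  obtain ⟨r, hr1, hr2, hr3⟩ := hex
  cases hbo : findBwd al j with
  | none =>
    rw [findBwd_none_iff] at hbo
    exact absurd hr3 (by rw [hbo r (by omega) hr2]; simp)
  | some m =>
    have hm := (findBwd_some_iff al j m).mp hbo
    obtain ⟨h1, h2, h3, h4⟩ := hm
    have hmr : r ≤ m := by
      by_contra hc
      exact absurd hr3 (by rw [h4 r (by omega) hr2]; simp)
    rw [findBwd_some_iff]
    refine ⟨h1, h2, by rw [liveAt_pySetD_ne al k m true hk0 h1 (by omega)]; exact h3, ?_⟩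
    intro q hq1 hq2
    rw [liveAt_pySetD_ne al k q true hk0 (by omega) (by omega)]
    exact h4 q hq1 hq2

theorem fwd_revive_eq (al : List Bool) (n k j : Int) (hk0 : 0 ≤ k) (hj : 0 ≤ j)
    (hex : ∃ l, j ≤ l ∧ l < k ∧ l < n ∧ liveAt al l = true) :
    findFwd (PySem.List.pySetD al k true) n j = findFwd al n j := by
  obtain ⟨l, hl1, hl2, hln, hl3⟩ := hex
  cases hfo : findFwd al n j with
  | none =>
    rw [findFwd_none_iff] at hfo
    exact absurd hl3 (by rw [hfo l hl1 hln]; simp)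
  | some m =>
    have hm := (findFwd_some_iff al n j m).mp hfo
    obtain ⟨h1, h2, h3, h4⟩ := hm
    have hml : m ≤ l := by
      by_contra hc
      exact absurd hl3 (by rw [h4 l hl1 (by omega)]; simp)
    rw [findFwd_some_iff]
    refine ⟨h1, h2, by rw [liveAt_pySetD_ne al k m true hk0 (by omega) (by omega)]; exact h3, ?_⟩
    intro q hq1 hq2
    rw [liveAt_pySetD_ne al k q true hk0 (by omega) (by omega)]
    exact h4 q hq1 hq2

theorem char_undo (n : Int) (gr : PySem.Dict Int (Option Int × Option Int)) (al : List Bool)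
    (k : Int) (hlen : al.length = n.toNat) (hChar : CharOf n gr al)
    (hk0 : 0 ≤ k) (hkn : k < n)
    (hnn : ¬(findBwd (PySem.List.pySetD al k true) (k-1) = none ∧
             findFwd (PySem.List.pySetD al k true) n (k+1) = none)) :
    ∀ i : Int,
      (match findBwd (PySem.List.pySetD al k true) (k-1),
             findFwd (PySem.List.pySetD al k true) n (k+1) with
        | none, none => gr
        | none, some r =>
            ((gr.insert k (none, some r)).modify r (none, none) (fun v => (some k, v.2)))
        | some l, none =>
            ((gr.insert k (some l, none)).modify l (none, none) (fun v => (v.1, some k)))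
        | some l, some r =>
            (((gr.insert k (some l, some r)).modify l (none, none)
              (fun v => (v.1, some k))).modify r (none, none) (fun v => (some k, v.2)))).get? i =
      (if 0 ≤ i ∧ i < n ∧ liveAt (PySem.List.pySetD al k true) i = true
       then some (findBwd (PySem.List.pySetD al k true) (i-1),
                  findFwd (PySem.List.pySetD al k true) n (i+1))
       else none) := by
  intro i
  have hn1 : 1 ≤ n := by omega
  have hklen : k < (al.length : Int) := by omega
  have hTk : liveAt (PySem.List.pySetD al k true) k = true :=
    liveAt_pySetD_self al k true hk0 hklen
  have hTne : ∀ q, 0 ≤ q → q ≠ k →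
      liveAt (PySem.List.pySetD al k true) q = liveAt al q :=
    fun q hq hne => liveAt_pySetD_ne al k q true hk0 hq hne
  cases hl0 : findBwd (PySem.List.pySetD al k true) (k-1) with
  | none =>
    cases hr0 : findFwd (PySem.List.pySetD al k true) n (k+1) with
    | none => exact absurd ⟨hl0, hr0⟩ hnn
    | some r =>
      have hld := (findBwd_none_iff _ (k-1)).mp hl0
      have hrr := (findFwd_some_iff _ n (k+1) r).mp hr0
      obtain ⟨hr1, hr2, hr3T, hr4⟩ := hrr
      have hr3 : liveAt al r = true := by rw [← hTne r (by omega) (by omega)]; exact hr3T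
      rw [get?_modify]
      by_cases hir : i = r
      · rw [if_pos hir, PySem.Dict.getD_eq_get?_getD, PySem.Dict.get?_insert,
          if_neg (by omega : r ≠ k)]
        have hgr_r : gr.get? r = some (findBwd al (r-1), findFwd al n (r+1)) := by
          have hx := hChar r; rw [if_pos ⟨by omega, hr2, hr3⟩] at hx; exact hx
        rw [hgr_r, if_pos ⟨by omega, by omega, by rw [hir]; rw [hTne r (by omega) (by omega)]; exact hr3⟩, hir]
        have hfst : findBwd (PySem.List.pySetD al k true) (r-1) = some k := by
          rw [findBwd_some_iff]
          exact ⟨hk0, by omega, hTk, fun m hm1 hm2 => hr4 m (by omega) (by omega)⟩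
        have hsnd : findFwd (PySem.List.pySetD al k true) n (r+1) = findFwd al n (r+1) :=
          fwd_revive_high al n k (r+1) hk0 (by omega)
        rw [hfst, hsnd]; rfl
      · rw [if_neg hir, PySem.Dict.get?_insert]
        by_cases hik : i = k
        · rw [if_pos hik,
            if_pos ⟨by omega, by omega, by rw [hik]; exact hTk⟩, hik, hl0, hr0]
        · rw [if_neg hik, hChar i]
          by_cases hca : 0 ≤ i ∧ i < n ∧ liveAt al i = true
          · obtain ⟨hi0, hin, hil⟩ := hca
            have hik' : k < i := by
              rcases lt_or_ge i k with hc | hc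
              · exfalso
                have := hld i hi0 (by omega)
                rw [hTne i hi0 hik] at this
                rw [this] at hil
                exact Bool.false_ne_true hil
              · omega
            have hri : r ≤ i := by
              by_contra hc
              have := hr4 i (by omega) (by omega)
              rw [hTne i hi0 hik] at this
              rw [this] at hil
              exact Bool.false_ne_true hil
            have hri' : r < i := by
              rcases eq_or_lt_of_le hri with he | hlt
              · exact absurd he.symm hir
              · exact hlt
            rw [if_pos ⟨hi0, hin, hil⟩, if_pos ⟨hi0, hin, by rw [hTne i hi0 hik]; exact hil⟩]
            have hbwd : findBwd (PySem.List.pySetD al k true) (i-1) = findBwd al (i-1) :=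
              bwd_revive_eq al k (i-1) hk0 ⟨r, by omega, by omega, hr3⟩
            have hfwd : findFwd (PySem.List.pySetD al k true) n (i+1) = findFwd al n (i+1) :=
              fwd_revive_high al n k (i+1) hk0 (by omega)
            rw [hbwd, hfwd]
          · rw [if_neg hca,
              if_neg (fun hc' => hca ⟨hc'.1, hc'.2.1, by rw [← hTne i hc'.1 hik]; exact hc'.2.2⟩)]
  | some l =>
    have hll := (findBwd_some_iff _ (k-1) l).mp hl0
    obtain ⟨hl1, hl2, hl3T, hl4⟩ := hll
    have hl3 : liveAt al l = true := by rw [← hTne l hl1 (by omega)]; exact hl3T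
    cases hr0 : findFwd (PySem.List.pySetD al k true) n (k+1) with
    | none =>
      have hrd := (findFwd_none_iff _ n (k+1)).mp hr0
      rw [get?_modify]
      by_cases hil' : i = l
      · rw [if_pos hil', PySem.Dict.getD_eq_get?_getD, PySem.Dict.get?_insert,
          if_neg (by omega : l ≠ k)]
        have hgr_l : gr.get? l = some (findBwd al (l-1), findFwd al n (l+1)) := by
          have hx := hChar l; rw [if_pos ⟨hl1, by omega, hl3⟩] at hx; exact hx
        rw [hgr_l, if_pos ⟨by omega, by omega, by rw [hil', hTne l hl1 (by omega)]; exact hl3⟩, hil']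
        have hfst : findBwd (PySem.List.pySetD al k true) (l-1) = findBwd al (l-1) :=
          bwd_revive_low al k (l-1) hk0 (by omega)
        have hsnd : findFwd (PySem.List.pySetD al k true) n (l+1) = some k := by
          rw [findFwd_some_iff]
          exact ⟨by omega, hkn, hTk, fun m hm1 hm2 => hl4 m (by omega) (by omega)⟩
        rw [hfst, hsnd]; rfl
      · rw [if_neg hil', PySem.Dict.get?_insert]
        by_cases hik : i = k
        · rw [if_pos hik,
            if_pos ⟨by omega, by omega, by rw [hik]; exact hTk⟩, hik, hl0, hr0]
        · rw [if_neg hik, hChar i]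
          by_cases hca : 0 ≤ i ∧ i < n ∧ liveAt al i = true
          · obtain ⟨hi0, hin, hil⟩ := hca
            have hik' : i < k := by
              rcases lt_or_ge i k with hc | hc
              · exact hc
              · exfalso
                have := hrd i (by omega) hin
                rw [hTne i hi0 hik] at this
                rw [this] at hil
                exact Bool.false_ne_true hil
            have hli : i < l := by
              by_contra hc
              have := hl4 i (by omega) (by omega)
              rw [hTne i hi0 hik] at this
              rw [this] at hil
              exact Bool.false_ne_true hil
            rw [if_pos ⟨hi0, hin, hil⟩, if_pos ⟨hi0, hin, by rw [hTne i hi0 hik]; exact hil⟩]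
            have hbwd : findBwd (PySem.List.pySetD al k true) (i-1) = findBwd al (i-1) :=
              bwd_revive_low al k (i-1) hk0 (by omega)
            have hfwd : findFwd (PySem.List.pySetD al k true) n (i+1) = findFwd al n (i+1) :=
              fwd_revive_eq al n k (i+1) hk0 (by omega) ⟨l, by omega, by omega, by omega, hl3⟩
            rw [hbwd, hfwd]
          · rw [if_neg hca,
              if_neg (fun hc' => hca ⟨hc'.1, hc'.2.1, by rw [← hTne i hc'.1 hik]; exact hc'.2.2⟩)]
    | some r =>
      have hrr := (findFwd_some_iff _ n (k+1) r).mp hr0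
      obtain ⟨hr1, hr2, hr3T, hr4⟩ := hrr
      have hr3 : liveAt al r = true := by rw [← hTne r (by omega) (by omega)]; exact hr3T
      have hlr : l ≠ r := by omega
      rw [get?_modify]
      by_cases hir : i = r
      · rw [if_pos hir, PySem.Dict.getD_eq_get?_getD, get?_modify, if_neg (by omega : r ≠ l),
          PySem.Dict.get?_insert, if_neg (by omega : r ≠ k)]
        have hgr_r : gr.get? r = some (findBwd al (r-1), findFwd al n (r+1)) := by
          have hx := hChar r; rw [if_pos ⟨by omega, hr2, hr3⟩] at hx; exact hx
        rw [hgr_r, if_pos ⟨by omega, by omega, by rw [hir, hTne r (by omega) (by omega)]; exact hr3⟩, hir]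
        have hfst : findBwd (PySem.List.pySetD al k true) (r-1) = some k := by
          rw [findBwd_some_iff]
          exact ⟨hk0, by omega, hTk, fun m hm1 hm2 => hr4 m (by omega) (by omega)⟩
        have hsnd : findFwd (PySem.List.pySetD al k true) n (r+1) = findFwd al n (r+1) :=
          fwd_revive_high al n k (r+1) hk0 (by omega)
        rw [hfst, hsnd]; rfl
      · rw [if_neg hir, get?_modify]
        by_cases hil' : i = l
        · rw [if_pos hil', PySem.Dict.getD_eq_get?_getD, PySem.Dict.get?_insert,
            if_neg (by omega : l ≠ k)]
          have hgr_l : gr.get? l = some (findBwd al (l-1), findFwd al n (l+1)) := by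
            have hx := hChar l; rw [if_pos ⟨hl1, by omega, hl3⟩] at hx; exact hx
          rw [hgr_l, if_pos ⟨by omega, by omega, by rw [hil', hTne l hl1 (by omega)]; exact hl3⟩, hil']
          have hfst : findBwd (PySem.List.pySetD al k true) (l-1) = findBwd al (l-1) :=
            bwd_revive_low al k (l-1) hk0 (by omega)
          have hsnd : findFwd (PySem.List.pySetD al k true) n (l+1) = some k := by
            rw [findFwd_some_iff]
            exact ⟨by omega, hkn, hTk, fun m hm1 hm2 => hl4 m (by omega) (by omega)⟩
          rw [hfst, hsnd]; rfl
        · rw [if_neg hil', PySem.Dict.get?_insert]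
          by_cases hik : i = k
          · rw [if_pos hik,
              if_pos ⟨by omega, by omega, by rw [hik]; exact hTk⟩, hik, hl0, hr0]
          · rw [if_neg hik, hChar i]
            by_cases hca : 0 ≤ i ∧ i < n ∧ liveAt al i = true
            · obtain ⟨hi0, hin, hil⟩ := hca
              rw [if_pos ⟨hi0, hin, hil⟩, if_pos ⟨hi0, hin, by rw [hTne i hi0 hik]; exact hil⟩]
              rcases lt_or_ge i k with hik' | hik'
              · have hli : i < l := by
                  by_contra hc
                  have := hl4 i (by omega) (by omega)
                  rw [hTne i hi0 hik] at this
                  rw [this] at hil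
                  exact Bool.false_ne_true hil
                have hbwd : findBwd (PySem.List.pySetD al k true) (i-1) = findBwd al (i-1) :=
                  bwd_revive_low al k (i-1) hk0 (by omega)
                have hfwd : findFwd (PySem.List.pySetD al k true) n (i+1) = findFwd al n (i+1) :=
                  fwd_revive_eq al n k (i+1) hk0 (by omega) ⟨l, by omega, by omega, by omega, hl3⟩
                rw [hbwd, hfwd]
              · have hri : r < i := by
                  rcases eq_or_lt_of_le hik' with he | hlt
                  · exact absurd he.symm hik
                  · by_contra hc
                    rcases eq_or_lt_of_le (le_of_not_gt hc) with he2 | hlt2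
                    · exact hir he2
                    · have := hr4 i (by omega) (by omega)
                      rw [hTne i hi0 hik] at this
                      rw [this] at hil
                      exact Bool.false_ne_true hil
                have hbwd : findBwd (PySem.List.pySetD al k true) (i-1) = findBwd al (i-1) :=
                  bwd_revive_eq al k (i-1) hk0 ⟨r, by omega, by omega, hr3⟩
                have hfwd : findFwd (PySem.List.pySetD al k true) n (i+1) = findFwd al n (i+1) :=
                  fwd_revive_high al n k (i+1) hk0 (by omega)
                rw [hbwd, hfwd]
            · rw [if_neg hca,
                if_neg (fun hc' => hca ⟨hc'.1, hc'.2.1, by rw [← hTne i hc'.1 hik]; exact hc'.2.2⟩)]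

theorem fold_preserve (n : Int) (hn : 1 ≤ n) :
    ∀ (cs : List String) sA sB, SimInv n sA sB →
      validCmds n sB.1 sB.2.1 sB.2.2 cs = true →
      SimInv n (cs.foldl stepA sA) (cs.foldl (stepB n) sB) := by
  intro cs
  induction cs with
  | nil => intro sA sB h _; exact h
  | cons c rest ih =>
    intro sA sB hInv hv
    obtain ⟨gr, garbage, pv⟩ := sA
    obtain ⟨al, st, p⟩ := sB
    obtain ⟨hlen, hpv, hmap, hnd, hChar, hgok⟩ := hInv
    dsimp only at hlen hpv hmap hnd hChar hgok hv ⊢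
    subst hpv
    rw [List.foldl_cons, List.foldl_cons]
    simp only [validCmds] at hv
    by_cases h1 : (PySem.Str.len c == 1) = true
    · rw [if_pos h1] at hv
      by_cases h2 : (c == "Z") = true
      · rw [if_pos h2] at hv
        cases st with
        | nil => exact absurd hv (by simp)
        | cons k st' =>
          cases garbage with
          | nil => simp at hmap
          | cons e grest =>
            obtain ⟨key, l, r⟩ := e
            rw [List.map_cons] at hmap
            injection hmap with hk1 hmap'
            subst hk1
            simp only [GOK] at hgok
            obtain ⟨hk0, hkn, hkd, hgl, hgr', hsome, hgrest⟩ := hgok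
            have hnn : ¬(findBwd (PySem.List.pySetD al key true) (key-1) = none ∧
                findFwd (PySem.List.pySetD al key true) n (key+1) = none) := by
              rintro ⟨ha, hb⟩
              rw [← hgl] at ha
              rw [← hgr'] at hb
              rcases hsome with hs | hs
              · rw [ha] at hs; simp at hs
              · rw [hb] at hs; simp at hs
            have hcu := char_undo n gr al key hlen hChar hk0 hkn hnn
            rw [← hgl, ← hgr'] at hcu
            have hlen' : (PySem.List.pySetD al key true).length = n.toNat := by
              rw [length_pySetD]; exact hlen
            have hsB : stepB n (al, key :: st', p) c = (PySem.List.pySetD al key true, st', p) := by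
              simp only [stepB]; rw [if_pos h1, if_pos h2]
            rw [hsB]
            cases l with
            | none =>
              cases r with
              | none =>
                exfalso
                rcases hsome with hs | hs <;> simp at hs
              | some r' =>
                have hsA : stepA (gr, (key, none, some r') :: grest, some p) c =
                    ((gr.insert key (none, some r')).modify r' (none, none)
                      (fun v => (some key, v.2)), grest, some p) := by
                  simp only [stepA]; rw [if_pos h1, if_pos h2]
                rw [hsA]
                exact ih _ _ ⟨hlen', rfl, hmap', nodup_keys_modify _ _ _ _
                  (PySem.Dict.nodup_keys_insert _ _ _ hnd), fun i => hcu i, hgrest⟩ hv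
            | some l' =>
              cases r with
              | none =>
                have hsA : stepA (gr, (key, some l', none) :: grest, some p) c =
                    ((gr.insert key (some l', none)).modify l' (none, none)
                      (fun v => (v.1, some key)), grest, some p) := by
                  simp only [stepA]; rw [if_pos h1, if_pos h2]
                rw [hsA]
                exact ih _ _ ⟨hlen', rfl, hmap', nodup_keys_modify _ _ _ _
                  (PySem.Dict.nodup_keys_insert _ _ _ hnd), fun i => hcu i, hgrest⟩ hv
              | some r' =>
                have hsA : stepA (gr, (key, some l', some r') :: grest, some p) c =
                    (((gr.insert key (some l', some r')).modify l' (none, none)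
                      (fun v => (v.1, some key))).modify r' (none, none)
                      (fun v => (some key, v.2)), grest, some p) := by
                  simp only [stepA]; rw [if_pos h1, if_pos h2]
                rw [hsA]
                exact ih _ _ ⟨hlen', rfl, hmap', nodup_keys_modify _ _ _ _
                  (nodup_keys_modify _ _ _ _ (PySem.Dict.nodup_keys_insert _ _ _ hnd)),
                  fun i => hcu i, hgrest⟩ hv
      · rw [if_neg h2] at hv
        by_cases hc : 0 ≤ p ∧ liveAt al p = true
        · rw [if_pos hc] at hv
          obtain ⟨hp0, hpl⟩ := hc
          have hplen : p < (al.length : Int) := liveAt_lt_length al p hpl hp0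
          have hpn : p < n := by omega
          have hgr : gr.get? p = some (findBwd al (p-1), findFwd al n (p+1)) := by
            have hx := hChar p; rw [if_pos ⟨hp0, hpn, hpl⟩] at hx; exact hx
          have hfw' : findFwd (PySem.List.pySetD al p false) n (p+1) = findFwd al n (p+1) :=
            fwd_kill_high al n p (p+1) hp0 (by omega)
          have hbw' : findBwd (PySem.List.pySetD al p false) (p-1) = findBwd al (p-1) :=
            bwd_kill_low al p (p-1) hp0 (by omega)
          have hlen' : (PySem.List.pySetD al p false).length = n.toNat := by
            rw [length_pySetD]; exact hlen
          have he1 : PySem.List.pySetD (PySem.List.pySetD al p false) p true =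
              PySem.List.pySetD al p true := pySetD_pySetD al p false true hp0
          have he2 : PySem.List.pySetD al p true = al := pySetD_same al p hpl hp0
          rw [hfw'] at hv
          cases hr0 : findFwd al n (p+1) with
          | none =>
            rw [hr0, hbw'] at hv
            cases hl0 : findBwd al (p-1) with
            | none => rw [hl0] at hv; exact absurd hv (by simp)
            | some l =>
              rw [hl0] at hv
              have hnn : ¬(findBwd al (p-1) = none ∧ findFwd al n (p+1) = none) := by
                rintro ⟨ha, _⟩; rw [hl0] at ha; simp at ha
              have hcd := char_delete n gr al p hlen hChar hp0 hpl hnn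
              rw [hl0, hr0] at hcd
              have hsA : stepA (gr, garbage, some p) c =
                  ((gr.modify l (none, none) (fun v => (v.1, none))).erase p,
                   (p, some l, none) :: garbage, some l) := by
                simp only [stepA]; rw [if_pos h1, if_neg h2, hgr, hl0, hr0]
              have hsB : stepB n (al, st, p) c = (PySem.List.pySetD al p false, p :: st, l) := by
                simp only [stepB]; rw [if_pos h1, if_neg h2, hfw', hr0, hbw', hl0]
              rw [hsA, hsB]
              refine ih _ _ ⟨hlen', rfl, by simp [hmap], nodup_keys_erase _ _
                (nodup_keys_modify _ _ _ _ hnd), fun i => hcd i, ?_⟩ hv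
              simp only [GOK]
              rw [he1, he2]
              exact ⟨hp0, hpn, liveAt_pySetD_false al p hp0, hl0.symm, hr0.symm,
                Or.inl (by simp), hgok⟩
          | some r =>
            rw [hr0] at hv
            have hnn : ¬(findBwd al (p-1) = none ∧ findFwd al n (p+1) = none) := by
              rintro ⟨_, hb⟩; rw [hr0] at hb; simp at hb
            have hcd := char_delete n gr al p hlen hChar hp0 hpl hnn
            cases hl0 : findBwd al (p-1) with
            | none =>
              rw [hl0, hr0] at hcd
              have hsA : stepA (gr, garbage, some p) c =
                  ((gr.modify r (none, none) (fun v => (none, v.2))).erase p,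
                   (p, none, some r) :: garbage, some r) := by
                simp only [stepA]; rw [if_pos h1, if_neg h2, hgr, hl0, hr0]
              have hsB : stepB n (al, st, p) c = (PySem.List.pySetD al p false, p :: st, r) := by
                simp only [stepB]; rw [if_pos h1, if_neg h2, hfw', hr0]
              rw [hsA, hsB]
              refine ih _ _ ⟨hlen', rfl, by simp [hmap], nodup_keys_erase _ _
                (nodup_keys_modify _ _ _ _ hnd), fun i => hcd i, ?_⟩ hv
              simp only [GOK]
              rw [he1, he2]
              exact ⟨hp0, hpn, liveAt_pySetD_false al p hp0, hl0.symm, hr0.symm,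
                Or.inr (by simp), hgok⟩
            | some l =>
              rw [hl0, hr0] at hcd
              have hsA : stepA (gr, garbage, some p) c =
                  (((gr.modify l (none, none) (fun v => (v.1, some r))).modify r (none, none)
                    (fun v => (some l, v.2))).erase p,
                   (p, some l, some r) :: garbage, some r) := by
                simp only [stepA]; rw [if_pos h1, if_neg h2, hgr, hl0, hr0]
              have hsB : stepB n (al, st, p) c = (PySem.List.pySetD al p false, p :: st, r) := by
                simp only [stepB]; rw [if_pos h1, if_neg h2, hfw', hr0]
              rw [hsA, hsB]
              refine ih _ _ ⟨hlen', rfl, by simp [hmap], nodup_keys_erase _ _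
                (nodup_keys_modify _ _ _ _ (nodup_keys_modify _ _ _ _ hnd)),
                fun i => hcd i, ?_⟩ hv
              simp only [GOK]
              rw [he1, he2]
              exact ⟨hp0, hpn, liveAt_pySetD_false al p hp0, hl0.symm, hr0.symm,
                Or.inl (by simp), hgok⟩
        · rw [if_neg hc] at hv
          exact absurd hv (by simp)
    · rw [if_neg h1] at hv
      cases hsp : PySem.Str.split? c " " with
      | none => rw [hsp] at hv; exact absurd hv (by simp)
      | some parts =>
        rw [hsp] at hv
        cases parts with
        | nil => exact absurd hv (by simp)
        | cons d parts2 =>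
          cases parts2 with
          | nil => exact absurd hv (by simp)
          | cons mv parts3 =>
            cases parts3 with
            | cons _ _ => exact absurd hv (by simp)
            | nil =>
              dsimp only at hv
              cases hos : PySem.Int.ofStr? mv with
              | none => rw [hos] at hv; exact absurd hv (by simp)
              | some x =>
                rw [hos] at hv
                dsimp only at hv
                cases hms : moveSteps n al (d == "D") x.toNat p with
                | none => rw [hms] at hv; exact absurd hv (by simp)
                | some p' =>
                  rw [hms] at hv
                  dsimp only at hv
                  obtain ⟨hA, hB⟩ := move_agree n gr al hlen hChar (d == "D") x.toNat p p' hms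
                  cases hd : (d == "D") with
                  | true =>
                    rw [hd] at hA hB
                    simp only [if_true] at hA hB
                    have hsA : stepA (gr, garbage, some p) c = (gr, garbage, some p') := by
                      simp only [stepA]
                      rw [if_neg h1, hsp]
                      dsimp only
                      rw [hos]
                      dsimp only
                      rw [if_pos hd, foldl_const, PySem.List.length_pyRange_one]
                      rw [show ((x : Int) - 0).toNat = x.toNat by omega]
                      rw [hA]
                    have hsB : stepB n (al, st, p) c = (al, st, p') := by
                      simp only [stepB]
                      rw [if_neg h1, hsp]
                      dsimp only
                      rw [hos]
                      dsimp only
                      rw [if_pos hd, foldl_const, PySem.List.length_pyRange_one]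
                      rw [show ((x : Int) - 0).toNat = x.toNat by omega]
                      rw [hB]
                    rw [hsA, hsB]
                    exact ih _ _ ⟨hlen, rfl, hmap, hnd, hChar, hgok⟩ hv
                  | false =>
                    rw [hd] at hA hB
                    simp only [Bool.false_eq_true, if_false] at hA hB
                    have hsA : stepA (gr, garbage, some p) c = (gr, garbage, some p') := by
                      simp only [stepA]
                      rw [if_neg h1, hsp]
                      dsimp only
                      rw [hos]
                      dsimp only
                      rw [if_neg (by simp [hd]), foldl_const, PySem.List.length_pyRange_one]
                      rw [show ((x : Int) - 0).toNat = x.toNat by omega]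
                      rw [hA]
                    have hsB : stepB n (al, st, p) c = (al, st, p') := by
                      simp only [stepB]
                      rw [if_neg h1, hsp]
                      dsimp only
                      rw [hos]
                      dsimp only
                      rw [if_neg (by simp [hd]), foldl_const, PySem.List.length_pyRange_one]
                      rw [show ((x : Int) - 0).toNat = x.toNat by omega]
                      rw [hB]
                    rw [hsA, hsB]
                    exact ih _ _ ⟨hlen, rfl, hmap, hnd, hChar, hgok⟩ hv

theorem find?_keymap (K : List Int) (f : Int → Option Int × Option Int) (i : Int) :
    (K.map (fun k => (k, f k))).find? (fun p => p.1 == i) =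
      if i ∈ K then some (i, f i) else none := by
  induction K with
  | nil => simp
  | cons a K' ih =>
    rw [List.map_cons]
    by_cases ha : a = i
    · subst ha
      rw [List.find?_cons_of_pos (by simp)]
      simp
    · rw [List.find?_cons_of_neg (by simp [ha]), ih]
      by_cases hm : i ∈ K'
      · rw [if_pos hm, if_pos (by simp [hm])]
      · rw [if_neg hm, if_neg (by simp [hm]; omega)]

theorem items_init (n : Int) :
    ((PySem.List.pyRange 0 n 1).foldl
      (fun d i => d.insert i ((some (i-1), some (i+1)) : Option Int × Option Int))
      PySem.Dict.empty).items =
    (PySem.List.pyRange 0 n 1).map (fun i => (i, (some (i-1), some (i+1)))) := by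
  have h := PySem.Dict.items_foldl_insert_fresh (PySem.List.pyRange 0 n 1) (fun i => i)
    (fun i => ((some (i-1), some (i+1)) : Option Int × Option Int)) PySem.Dict.empty
    (fun a _ => PySem.Dict.contains_empty a) (by simpa using PySem.List.nodup_pyRange_one 0 n)
  simpa using h

theorem get?_init (n : Int) (i : Int) :
    ((PySem.List.pyRange 0 n 1).foldl
      (fun d i => d.insert i ((some (i-1), some (i+1)) : Option Int × Option Int))
      PySem.Dict.empty).get? i =
    if 0 ≤ i ∧ i < n then some (some (i-1), some (i+1)) else none := by
  unfold PySem.Dict.get?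
  rw [items_init, find?_keymap]
  by_cases hm : i ∈ PySem.List.pyRange 0 n 1
  · rw [if_pos hm, if_pos (by rw [← PySem.List.mem_pyRange_one]; exact hm)]
    rfl
  · rw [if_neg hm, if_neg (by rw [← PySem.List.mem_pyRange_one]; exact hm)]
    rfl

theorem char_init (n : Int) (hn : 1 ≤ n) :
    CharOf n
      ((((PySem.List.pyRange 0 n 1).foldl
          (fun d i => d.insert i ((some (i-1), some (i+1)) : Option Int × Option Int))
          PySem.Dict.empty).modify 0 (none, none) (fun v => (none, v.2))).modify (n-1) (none, none)
          (fun v => (v.1, none)))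
      (PySem.List.pyRepeat [true] n) := by
  intro i
  rw [get?_modify, get?_modify, PySem.Dict.getD_eq_get?_getD, get?_modify,
    PySem.Dict.getD_eq_get?_getD, get?_init, get?_init, get?_init]
  by_cases hin : 0 ≤ i ∧ i < n
  · have hRc : 0 ≤ i ∧ i < n ∧ liveAt (PySem.List.pyRepeat [true] n) i = true :=
      ⟨hin.1, hin.2, by rw [liveAt_replicate n i hin.1]; simp [hin.2]⟩
    rw [if_pos hRc]
    rw [findBwd_replicate n (i-1) (by omega), findFwd_replicate n (i+1) (by omega)]
    by_cases hi1 : i = n-1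
    · rw [if_pos hi1]
      by_cases hi0 : (n-1 : Int) = 0
      · rw [if_pos hi0, if_pos (by omega : (0:Int) ≤ 0 ∧ 0 < n)]
        rw [if_neg (by omega : ¬ 0 ≤ i - 1), if_neg (by omega : ¬ i + 1 < n)]
        rfl
      · rw [if_neg hi0, if_pos (by omega : 0 ≤ n-1 ∧ n-1 < n)]
        rw [if_pos (by omega : 0 ≤ i - 1), if_neg (by omega : ¬ i + 1 < n)]
        have e1 : i - 1 = n - 1 - 1 := by omega
        rw [e1]
        rfl
    · rw [if_neg hi1]
      by_cases hi0 : i = 0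
      · rw [if_pos hi0, if_pos (by omega : (0:Int) ≤ 0 ∧ 0 < n)]
        rw [if_neg (by omega : ¬ 0 ≤ i - 1), if_pos (by omega : i + 1 < n)]
        rw [hi0]
        rfl
      · rw [if_neg hi0, if_pos (by omega : 0 ≤ i ∧ i < n)]
        rw [if_pos (by omega : 0 ≤ i - 1), if_pos (by omega : i + 1 < n)]
  · rw [if_neg (by omega : ¬ i = n - 1), if_neg (by omega : ¬ i = 0), if_neg hin,
      if_neg (show ¬(0 ≤ i ∧ i < n ∧ liveAt (PySem.List.pyRepeat [true] n) i = true) from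
        fun hc => hin ⟨hc.1, hc.2.1⟩)]

theorem keys_init_nodup (n : Int) :
    ((((PySem.List.pyRange 0 n 1).foldl
        (fun d i => d.insert i ((some (i-1), some (i+1)) : Option Int × Option Int))
        PySem.Dict.empty).modify 0 (none, none) (fun v => (none, v.2))).modify (n-1) (none, none)
        (fun v => (v.1, none))).keys.Nodup := by
  apply nodup_keys_modify
  apply nodup_keys_modify
  show (((PySem.List.pyRange 0 n 1).foldl
      (fun d i => d.insert i ((some (i-1), some (i+1)) : Option Int × Option Int))
      PySem.Dict.empty).items.map (fun x => x.1)).Nodup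
  rw [items_init, List.map_map]
  simpa [Function.comp_def] using PySem.List.nodup_pyRange_one 0 n

theorem setO_spec : ∀ (K : List Int) (acc : List String),
    (∀ k ∈ K, 0 ≤ k ∧ k < (acc.length : Int)) →
    ((K.foldl (fun a k => PySem.List.pySetD a k "O") acc).length = acc.length ∧
     ∀ i : Int, 0 ≤ i → i < (acc.length : Int) →
       PySem.List.pyGetD (K.foldl (fun a k => PySem.List.pySetD a k "O") acc) i "?" =
         if i ∈ K then "O" else PySem.List.pyGetD acc i "?") := by
  intro K
  induction K with
  | nil => exact fun acc _ => ⟨rfl, fun i _ _ => by simp⟩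
  | cons a K' ih =>
    intro acc hb
    rw [List.foldl_cons]
    obtain ⟨ha0, hal⟩ := hb a (by simp)
    have hb' : ∀ k ∈ K', 0 ≤ k ∧ k < ((PySem.List.pySetD acc a "O").length : Int) := by
      intro k hk
      rw [length_pySetD]
      exact hb k (by simp [hk])
    obtain ⟨hL, hS⟩ := ih (PySem.List.pySetD acc a "O") hb'
    refine ⟨by rw [hL, length_pySetD], ?_⟩
    intro i hi0 hilt
    rw [hS i hi0 (by rw [length_pySetD]; exact hilt)]
    by_cases hm : i ∈ K'
    · rw [if_pos hm, if_pos (by simp [hm])]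
    · rw [if_neg hm]
      by_cases hia : i = a
      · rw [if_pos (by simp [hia]), hia]
        exact pyGetD_pySetD_self acc a "O" "?" ha0 (by omega)
      · rw [if_neg (by simp [hia, hm])]
        exact pyGetD_pySetD_ne acc a i "O" "?" ha0 hi0 hia

theorem answer_agree (n : Int) (hn : 1 ≤ n)
    (gr : PySem.Dict Int (Option Int × Option Int)) (al : List Bool)
    (hlen : al.length = n.toNat) (hChar : CharOf n gr al) :
    gr.keys.foldl (fun a k => PySem.List.pySetD a k "O") (PySem.List.pyRepeat ["X"] n) =
      al.map (fun a => if a then "O" else "X") := by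
  have hmem : ∀ i : Int, i ∈ gr.keys ↔ (0 ≤ i ∧ i < n ∧ liveAt al i = true) := by
    intro i
    constructor
    · intro hk
      by_contra hc
      have h0 := hChar i
      rw [if_neg hc] at h0
      exact (PySem.Dict.get?_eq_none_iff_not_mem_keys gr i).mp h0 hk
    · intro hc
      by_contra hk
      have h0 := (PySem.Dict.get?_eq_none_iff_not_mem_keys gr i).mpr hk
      rw [hChar i, if_pos hc] at h0
      simp at h0
  have haccl : ((PySem.List.pyRepeat ["X"] n).length : Int) = n := by
    rw [PySem.List.pyRepeat_singleton, List.length_replicate]; omega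
  obtain ⟨hL, hS⟩ := setO_spec gr.keys (PySem.List.pyRepeat ["X"] n)
    (fun k hk => by
      obtain ⟨h1, h2, _⟩ := (hmem k).mp hk
      rw [haccl]
      exact ⟨h1, h2⟩)
  apply List.ext_getElem
  · rw [hL, PySem.List.pyRepeat_singleton, List.length_replicate, List.length_map, hlen]
  · intro idx h1 h2
    have hidxn : (idx : Int) < n := by
      rw [List.length_map, hlen] at h2; omega
    have hgd := hS (idx : Int) (by omega) (by omega)
    rw [PySem.List.pyGetD_of_nonneg _ _ (by omega : (0:Int) ≤ (idx:Int)),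
      PySem.List.pyGetD_of_nonneg _ _ (by omega : (0:Int) ≤ (idx:Int))] at hgd
    simp only [Int.toNat_natCast] at hgd
    rw [List.getD_eq_getElem?_getD, List.getElem?_eq_getElem h1] at hgd
    simp only [Option.getD_some] at hgd
    rw [hgd]
    have hidxa : idx < al.length := by rw [List.length_map] at h2; exact h2
    rw [List.getElem_map]
    have hlive : liveAt al (idx : Int) = al[idx] := by
      rw [liveAt, PySem.List.pyGetD_of_nonneg _ _ (by omega : (0:Int) ≤ (idx:Int))]
      simp only [Int.toNat_natCast]
      rw [List.getD_eq_getElem?_getD, List.getElem?_eq_getElem hidxa]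
      rfl
    by_cases hmi : (idx : Int) ∈ gr.keys
    · rw [if_pos hmi]
      obtain ⟨-, -, h3⟩ := (hmem _).mp hmi
      rw [hlive] at h3
      rw [h3]
      rfl
    · rw [if_neg hmi]
      have h3 : liveAt al (idx : Int) = false := by
        by_contra hc
        exact hmi ((hmem _).mpr ⟨by omega, hidxn, by simpa using hc⟩)
      rw [hlive] at h3
      rw [h3]
      rw [List.getD_eq_getElem?_getD, List.getElem?_eq_getElem (by
        rw [PySem.List.pyRepeat_singleton, List.length_replicate]; omega)]
      simp [PySem.List.pyRepeat_singleton]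

-- ===== VERDICT (by name: the statement is the Claim_ definition above) =====
-- ---- the dead-list validity walk agrees with the list-based one ----

theorem fwdD_stop (n : Int) (dead : List Int) (j : Int) (h : n ≤ j) : fwdD n dead j = none := by
  unfold fwdD
  rw [show (n - j).toNat = 0 by omega]
  rfl

theorem fwdD_step (n : Int) (dead : List Int) (j : Int) (h : j < n) :
    fwdD n dead j = if dead.contains j then fwdD n dead (j+1) else some j := by
  unfold fwdD
  rw [show (n - j).toNat = (n - (j+1)).toNat + 1 by omega]
  rfl

theorem bwdD_stop (dead : List Int) (j : Int) (h : j < 0) : bwdD dead j = none := by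
  unfold bwdD
  rw [show (j + 1).toNat = 0 by omega]
  rfl

theorem bwdD_step (dead : List Int) (j : Int) (h : 0 ≤ j) :
    bwdD dead j = if dead.contains j then bwdD dead (j-1) else some j := by
  unfold bwdD
  rw [show (j + 1).toNat = (j - 1 + 1).toNat + 1 by omega]
  rfl

theorem fwdD_eq (n : Int) (dead : List Int) (al : List Bool)
    (hcorr : ∀ m : Int, 0 ≤ m → liveAt al m = (decide (m < n) && !dead.contains m)) :
    ∀ j : Int, 0 ≤ j → fwdD n dead j = findFwd al n j := by
  have H : ∀ t : Nat, ∀ j : Int, 0 ≤ j → (n - j).toNat = t → fwdD n dead j = findFwd al n j := by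
    intro t
    induction t with
    | zero =>
      intro j hj ht
      rw [fwdD_stop n dead j (by omega), findFwd_nil al n j (by omega)]
    | succ t ih =>
      intro j hj ht
      have hjn : j < n := by omega
      rw [fwdD_step n dead j hjn, findFwd_cons al n j hjn, hcorr j hj]
      cases hc : dead.contains j with
      | true => simp only [hc, Bool.not_true, Bool.and_false, if_false]; exact ih (j+1) (by omega) (by omega)
      | false => simp [hc, hjn]
  exact fun j hj => H _ j hj rfl

theorem bwdD_eq (n : Int) (dead : List Int) (al : List Bool)
    (hcorr : ∀ m : Int, 0 ≤ m → liveAt al m = (decide (m < n) && !dead.contains m)) :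
    ∀ j : Int, j < n → bwdD dead j = findBwd al j := by
  have H : ∀ t : Nat, ∀ j : Int, j < n → (j + 1).toNat = t → bwdD dead j = findBwd al j := by
    intro t
    induction t with
    | zero =>
      intro j hj ht
      rw [bwdD_stop dead j (by omega), findBwd_nil al j (by omega)]
    | succ t ih =>
      intro j hj ht
      have hj0 : 0 ≤ j := by omega
      rw [bwdD_step dead j hj0, findBwd_cons al j hj0, hcorr j hj0]
      cases hc : dead.contains j with
      | true => simp only [hc, Bool.not_true, Bool.and_false, if_false]; exact ih (j-1) (by omega) (by omega)
      | false => simp [hc, hj]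
  exact fun j hj => H _ j hj rfl

theorem moveStepsD_eq (n : Int) (dead : List Int) (al : List Bool) (dirD : Bool)
    (hcorr : ∀ m : Int, 0 ≤ m → liveAt al m = (decide (m < n) && !dead.contains m)) :
    ∀ (k : Nat) (p : Int), moveStepsD n dead dirD k p = moveSteps n al dirD k p := by
  intro k
  induction k with
  | zero => intro p; rfl
  | succ k ih =>
    intro p
    simp only [moveStepsD, moveSteps]
    by_cases hc : 0 ≤ p ∧ p < n ∧ dead.contains p = false
    · have hc' : 0 ≤ p ∧ liveAt al p = true := by
        refine ⟨hc.1, ?_⟩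
        rw [hcorr p hc.1, hc.2.2]
        simp [hc.2.1]
      rw [if_pos hc, if_pos hc']
      rw [show (if dirD then fwdD n dead (p+1) else bwdD dead (p-1)) =
          (if dirD then findFwd al n (p+1) else findBwd al (p-1)) by
        cases dirD
        · simp only [Bool.false_eq_true, if_false]
          exact bwdD_eq n dead al hcorr (p-1) (by omega)
        · simp only [if_true]
          exact fwdD_eq n dead al hcorr (p+1) (by omega)]
      cases findFwd al n (p+1) <;> cases findBwd al (p-1) <;> cases dirD <;> simp [ih]
    · have hc' : ¬(0 ≤ p ∧ liveAt al p = true) := by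
        rintro ⟨h1, h2⟩
        rw [hcorr p h1] at h2
        exact hc ⟨h1, by simpa using h2⟩
      rw [if_neg hc, if_neg hc']

theorem validCmdsD_eq (n : Int) :
    ∀ (cs : List String) (dead : List Int) (st : List Int) (p : Int) (al : List Bool),
      dead.Nodup → al.length = n.toNat →
      (∀ k ∈ st, 0 ≤ k ∧ k < n) →
      (∀ m : Int, 0 ≤ m → liveAt al m = (decide (m < n) && !dead.contains m)) →
      validCmdsD n dead st p cs = validCmds n al st p cs := by
  intro cs
  induction cs with
  | nil => intro dead st p al _ _ _ _; rfl
  | cons c rest ih =>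
    intro dead st p al hndd hlen hst hcorr
    simp only [validCmdsD, validCmds]
    by_cases h1 : (PySem.Str.len c == 1) = true
    · rw [if_pos h1, if_pos h1]
      by_cases h2 : (c == "Z") = true
      · rw [if_pos h2, if_pos h2]
        cases st with
        | nil => rfl
        | cons k st' =>
          dsimp only
          obtain ⟨hk0, hkn⟩ := hst k (by simp)
          have hklen : k < (al.length : Int) := by omega
          cases hkd : dead.contains k with
          | true =>
            have hkmem : k ∈ dead := by simpa using hkd
            have hkal : liveAt al k = false := by
              rw [hcorr k hk0, hkd]; simp
            apply ih
            · exact hndd.erase k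
            · rw [length_pySetD]; exact hlen
            · exact fun q hq => hst q (by simp [hq])
            · intro m hm
              by_cases hmk : m = k
              · rw [hmk, liveAt_pySetD_self al k true hk0 hklen]
                have hknot : k ∉ dead.erase k := hndd.not_mem_erase
                simp [List.contains_eq_mem, hknot, hkn]
              · rw [liveAt_pySetD_ne al k m true hk0 hm hmk, hcorr m hm]
                have : (m ∈ dead.erase k) = (m ∈ dead) := by
                  simp [List.mem_erase_of_ne hmk]
                simp [List.contains_eq_mem, this]
          | false =>
            have hkal : liveAt al k = true := by
              rw [hcorr k hk0, hkd]; simp [hkn]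
            have he : dead.erase k = dead := List.erase_of_not_mem (by simpa using hkd)
            have hsame : PySem.List.pySetD al k true = al := pySetD_same al k hkal hk0
            rw [he, hsame]
            apply ih dead st' p al hndd hlen (fun q hq => hst q (by simp [hq])) hcorr
      · rw [if_neg h2, if_neg h2]
        by_cases hc : 0 ≤ p ∧ p < n ∧ dead.contains p = false
        · have hc' : 0 ≤ p ∧ liveAt al p = true := by
            refine ⟨hc.1, ?_⟩
            rw [hcorr p hc.1, hc.2.2]
            simp [hc.2.1]
          rw [if_pos hc, if_pos hc']
          obtain ⟨hp0, hpn, hpd⟩ := hc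
          have hcorr' : ∀ m : Int, 0 ≤ m →
              liveAt (PySem.List.pySetD al p false) m =
                (decide (m < n) && !(p :: dead).contains m) := by
            intro m hm
            by_cases hmp : m = p
            · rw [hmp, liveAt_pySetD_false al p hp0]
              simp [List.contains_eq_mem]
            · rw [liveAt_pySetD_ne al p m false hp0 hm hmp, hcorr m hm]
              simp [List.contains_eq_mem, hmp]
          have hfw : fwdD n (p :: dead) (p+1) = findFwd (PySem.List.pySetD al p false) n (p+1) :=
            fwdD_eq n (p :: dead) _ hcorr' (p+1) (by omega)
          have hbw : bwdD (p :: dead) (p-1) = findBwd (PySem.List.pySetD al p false) (p-1) :=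
            bwdD_eq n (p :: dead) _ hcorr' (p-1) (by omega)
          have hnd' : (p :: dead).Nodup := by
            refine List.nodup_cons.mpr ⟨by simpa using hpd, hndd⟩
          have hlen' : (PySem.List.pySetD al p false).length = n.toNat := by
            rw [length_pySetD]; exact hlen
          have hst' : ∀ q ∈ p :: st, 0 ≤ q ∧ q < n := by
            intro q hq
            rcases List.mem_cons.mp hq with h | h
            · subst h; exact ⟨hp0, hpn⟩
            · exact hst q h
          rw [hfw, hbw]
          cases findFwd (PySem.List.pySetD al p false) n (p+1) with
          | some j => exact ih (p :: dead) (p :: st) j _ hnd' hlen' hst' hcorr'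
          | none =>
            cases findBwd (PySem.List.pySetD al p false) (p-1) with
            | some j => exact ih (p :: dead) (p :: st) j _ hnd' hlen' hst' hcorr'
            | none => rfl
        · have hc' : ¬(0 ≤ p ∧ liveAt al p = true) := by
            rintro ⟨ha, hb⟩
            rw [hcorr p ha] at hb
            exact hc ⟨ha, by simpa using hb⟩
          rw [if_neg hc, if_neg hc']
    · rw [if_neg h1, if_neg h1]
      cases PySem.Str.split? c " " with
      | none => rfl
      | some parts =>
        cases parts with
        | nil => rfl
        | cons d parts2 =>
          cases parts2 with
          | nil => rfl
          | cons mv parts3 =>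
            cases parts3 with
            | cons _ _ => rfl
            | nil =>
              dsimp only
              cases PySem.Int.ofStr? mv with
              | none => rfl
              | some x =>
                dsimp only
                rw [moveStepsD_eq n dead al (d == "D") hcorr x.toNat p]
                cases moveSteps n al (d == "D") x.toNat p with
                | none => rfl
                | some p' => exact ih dead st p' al hndd hlen hst hcorr

theorem solution_spec : Claim_equal_solution := by
  intro n pivot cmd _ hPre
  obtain ⟨hn, hv⟩ := hPre
  unfold Spec_solution solution solution_alt
  dsimp only
  have hInv0 : SimInv n
      ((((PySem.List.pyRange 0 n 1).foldl
          (fun d i => d.insert i ((some (i-1), some (i+1)) : Option Int × Option Int))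
          PySem.Dict.empty).modify 0 (none, none) (fun v => (none, v.2))).modify (n-1) (none, none)
          (fun v => (v.1, none)), ([] : List (Int × Option Int × Option Int)), some pivot)
      (PySem.List.pyRepeat [true] n, ([] : List Int), pivot) := by
    refine ⟨?_, rfl, rfl, keys_init_nodup n, char_init n hn, trivial⟩
    simp [PySem.List.pyRepeat_singleton]
  have hcorr0 : ∀ m : Int, 0 ≤ m →
      liveAt (PySem.List.pyRepeat [true] n) m = (decide (m < n) && !(([] : List Int)).contains m) := by
    intro m hm
    rw [liveAt_replicate n m hm]
    simp
  rw [validCmdsD_eq n cmd [] [] pivot (PySem.List.pyRepeat [true] n) List.nodup_nil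
    (by simp [PySem.List.pyRepeat_singleton]) (by simp) hcorr0] at hv
  have hF := fold_preserve n hn cmd _ _ hInv0 hv
  obtain ⟨hlen, _, _, _, hChar, _⟩ := hF
  rw [answer_agree n hn _ _ hlen hChar]
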